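-- pv_equiv track=rewrite | github.com/Lucasmikael/pantheon_ird | Program/pythonis_tools.py | ExtractCoreNetwork
-- ===== SOURCE A (Python) =====
-- def ExtractCoreNetwork(genes_network):
--     """
--     Takes a genes network and recursively prune it from the leaf up and root down until only the core network remain (i.e. cluster or set of clusters of genes).
--     Returns the core network.
--     """
--
--     # to pop a key from a dictionary and return its value or 'default_value' if it is not in the dict : name_of__dict.pop(name_of_key, default_value)
--     # to check if a key is in a dictionary and return its value of 'default_value' if it is not in the dict : name_of_dict.get(name_of_key, default_value)
--     # BEWARE : you cannot change the size of a dictionary while iterating over it -> first create a list of keys to be removed, then iterate over this list to delete these entries from the dictionary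
--     # OR create a copy of the dict to iterate over while you delete the entries from the original dictionary name_of_dict2 = dict(name_of_dict)
--     # to iterate efficiently over a dict key/value pairs, use .items() : for key, values in name_of_dict.items(): whatever...
--
--     genes_network_copy = dict(genes_network)
--     source_genes = genes_network.keys()
--     target_genes = []
--     for inter_target_list in genes_network.values():
--         for inter_target in inter_target_list:
--             target_genes.append(inter_target[1])
--     target_genes = set(target_genes)
--
--     network_downcopy = dict(genes_network_copy)
--     down_pruning_not_done = 1
--
--     # pruning the network down the roots first
--     print ('Extracting core network - root pruning in progress...')
--     while down_pruning_not_done :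
--         # set the flag to stop if no genes are removed from the network during the iteration
--         down_pruning_not_done = 0
--         for source, targets in network_downcopy.items():
--             if source not in target_genes:
--                 # remove all genes with no regulators from the network
--                 genes_network_copy.pop(source,None)
--                 # update the list of genes being targeted
--                 target_genes = []
--                 for inter_target_list in genes_network_copy.values():
--                     for inter_target in inter_target_list:
--                         target_genes.append(inter_target[1])
--                 target_genes = set(target_genes)
--                 # raise the flag for an additional pass each time we find genes to remove
--                 down_pruning_not_done = 1
--         # update the network copy for the next pass if there is one
--         if down_pruning_not_done:
--             network_downcopy = dict(genes_network_copy)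
--
--
--     network_upcopy = dict(genes_network_copy)
--     up_pruning_not_done = 1
--
--     #pruning the network up the leaves next
--     print ('Extracting core network - leaf pruning in progress...')
--     while up_pruning_not_done :
--         # set the flag to stop if no genes are removed from the network during the iteration
--         up_pruning_not_done = 0
--         for source, targets in network_upcopy.items():
--             target_list = list(targets)
--             for current_target in target_list:
--                 # current_target is in the format [interaction, target_gene_name]
--                 if current_target[1] not in network_upcopy.keys():
--                     # remove target genes which have no target themselves
--                     target_list.remove(current_target)
--                     # update the list of targets from the network and if it was the last target of the source gene, remove its entry from the network
--                     if target_list != []: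
--                         genes_network_copy[source]=target_list
--                     else:
--                         genes_network_copy.pop(source,None)
--                     # raise the flag for an additional pass each time we find genes to remove
--                     up_pruning_not_done = 1
--         # update the network copy for the next pass if there is one
--         if up_pruning_not_done:
--             network_upcopy = dict(genes_network_copy)
--
--     return genes_network_copy
-- ===== SOURCE B (Python) =====
-- def ExtractCoreNetwork(genes_network):
--     """Kahn-style peeling with incremental degree bookkeeping (worklist) instead
--     of A's repeated full rescans after every removal."""
--     net = dict(genes_network)
--     keys = list(net)
--
--     # Phase 1 (root pruning): peel keys targeted by no live key, maintaining an
--     # in-degree counter per key and a worklist of zero-in-degree keys.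
--     indeg = {k: 0 for k in keys}
--     for k in keys:
--         for e in net[k]:
--             if e[1] in indeg:
--                 indeg[e[1]] += 1
--     alive = set(keys)
--     stack = [k for k in keys if indeg[k] == 0]
--     while stack:
--         k = stack.pop()
--         alive.discard(k)
--         for e in net[k]:
--             t = e[1]
--             if t in alive:
--                 indeg[t] -= 1
--                 if indeg[t] == 0:
--                     stack.append(t)
--     alive1 = [k for k in keys if k in alive]
--
--     # Phase 2 (leaf pruning): peel keys whose every interaction targets a dead
--     # key, maintaining a live-out-edge counter and a reverse adjacency list.
--     supp = {k: 0 for k in alive1}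
--     rev = {k: [] for k in alive1}
--     for k in alive1:
--         for e in net[k]:
--             if e[1] in supp:
--                 supp[k] += 1
--                 rev[e[1]].append(k)
--     core = set(alive1)
--     stack = [k for k in alive1 if net[k] and supp[k] == 0]
--     while stack:
--         t = stack.pop()
--         core.discard(t)
--         for j in rev[t]:
--             if j in core:
--                 supp[j] -= 1
--                 if supp[j] == 0 and net[j]:
--                     stack.append(j)
--
--     return {k: [e for e in net[k] if e[1] in core] for k in keys if k in core}
-- ===== Notes on version B (the rewrite author's own statement) =====
-- stated objective: faster
-- what changed: A prunes by repeatedly rescanning and mutating a dict copy, rebuilding the complete target list after every single removal; B does Kahn-style worklist peeling with incremental degree bookkeeping: per-key in-degree counters for root pruning and live-out-edge counters plus a reverse adjacency list for leaf pruning, each edge being touched O(1) times.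
import Mathlib
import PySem

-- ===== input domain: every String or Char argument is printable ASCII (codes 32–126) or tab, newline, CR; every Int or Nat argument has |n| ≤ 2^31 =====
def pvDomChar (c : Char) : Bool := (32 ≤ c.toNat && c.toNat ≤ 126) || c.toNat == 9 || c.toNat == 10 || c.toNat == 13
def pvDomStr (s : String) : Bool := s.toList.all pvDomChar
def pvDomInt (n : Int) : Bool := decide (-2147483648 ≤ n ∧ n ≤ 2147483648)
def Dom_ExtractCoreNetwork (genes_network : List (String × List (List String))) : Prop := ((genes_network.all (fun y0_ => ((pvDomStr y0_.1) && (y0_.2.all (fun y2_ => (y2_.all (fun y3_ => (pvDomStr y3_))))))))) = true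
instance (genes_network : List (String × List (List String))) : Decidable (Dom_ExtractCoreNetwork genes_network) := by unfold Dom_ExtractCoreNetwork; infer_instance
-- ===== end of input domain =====

-- B replaces A's mutate-and-rescan dict passes (full target-list rebuild after every
-- removal) by Kahn-style worklist peeling with incremental degree counters; equality
-- of the two results is proved via a greatest-fixpoint sandwich argument.

abbrev PVNet := List (String × List (List String))

-- e[1] (exact under Pre_: every edge has length ≥ 2)
def pvTgt (e : List String) : String := PySem.List.pyGetD e 1 ""

-- state helpers on the items list: same bodies as PySem.Dict.erase / .insert / d[k]
def pvErase (st : PVNet) (k : String) : PVNet := st.filter (fun p => !(p.1 == k))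
def pvSet (st : PVNet) (k : String) (v : List (List String)) : PVNet :=
  if st.any (fun p => p.1 == k) then st.map (fun p => if p.1 == k then (k, v) else p)
  else st ++ [(k, v)]
def pvGet (st : PVNet) (k : String) : List (List String) :=
  match st.find? (fun p => p.1 == k) with
  | some p => p.2
  | none => []

-- ===== PORT A =====
def pvTargetList (st : PVNet) : List String :=
  st.foldl (fun acc kv => kv.2.foldl (fun a e => a ++ [pvTgt e]) acc) []

def pvRootPass : PVNet → PVNet → PySem.Set String → Bool → PVNet × PySem.Set String × Bool
  | [], copy, tset, flag => (copy, tset, flag)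
  | (source, _) :: rest, copy, tset, flag =>
    if PySem.Set.contains tset source then pvRootPass rest copy tset flag
    else
      let copy' := pvErase copy source
      pvRootPass rest copy' (PySem.Set.ofList (pvTargetList copy')) true

def pvRootLoop : Nat → PVNet → PySem.Set String → PVNet
  | 0, copy, _ => copy
  | fuel+1, copy, tset =>
    match pvRootPass copy copy tset false with
    | (copy', tset', flag) => if flag then pvRootLoop fuel copy' tset' else copy'

def pvLeafInner (snapKeys : List String) (source : String) (l : List (List String)) (i : Nat)
    (copy : PVNet) (flag : Bool) : PVNet × Bool :=
  if h : i < l.length then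
    let x := l[i]
    if snapKeys.contains (pvTgt x) then pvLeafInner snapKeys source l (i+1) copy flag
    else
      let l' := (PySem.List.remove? l x).getD l
      let copy' := if l'.isEmpty then pvErase copy source else pvSet copy source l'
      pvLeafInner snapKeys source l' (i+1) copy' true
  else (copy, flag)
termination_by l.length - i
decreasing_by
  · omega
  · have hx : x ∈ l := List.getElem_mem h
    have hr : (PySem.List.remove? l l[i]).getD l = l.erase l[i] := by
      rw [PySem.List.remove?_eq_some_erase l l[i] hx]; rfl
    rw [hr]
    have h2 : (l.erase l[i]).length = l.length - 1 := List.length_erase_of_mem hx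
    rw [h2]
    omega

def pvLeafPass (snapKeys : List String) : List (String × List (List String)) → PVNet → Bool → PVNet × Bool
  | [], copy, flag => (copy, flag)
  | (source, targets) :: rest, copy, flag =>
    match pvLeafInner snapKeys source targets 0 copy flag with
    | (copy', flag') => pvLeafPass snapKeys rest copy' flag'

def pvEdgeCount (st : PVNet) : Nat := (st.map (fun kv => kv.2.length)).sum

def pvLeafLoop : Nat → PVNet → PVNet
  | 0, copy => copy
  | fuel+1, copy =>
    match pvLeafPass (copy.map Prod.fst) copy copy false with
    | (copy', flag) => if flag then pvLeafLoop fuel copy' else copy'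

def ExtractCoreNetwork (genes_network : List (String × List (List String))) : List (String × List (List String)) :=
  let d0 := (PySem.Dict.ofList genes_network).items
  let tset := PySem.Set.ofList (pvTargetList d0)
  let d1 := pvRootLoop (d0.length + 1) d0 tset
  pvLeafLoop (pvEdgeCount d1 + 1) d1

-- ===== PORT B =====
-- the zero-initialised in-degree dict over the keys, then one pass over all edges
-- incrementing the counter of each targeted key (the two nested for-loops of Source B)
def pvIndegInit (net : PVNet) (keys : List String) : PySem.Dict String Int :=
  keys.foldl (fun dg k =>
      (pvGet net k).foldl (fun dg e =>
        if dg.contains (pvTgt e) then dg.insert (pvTgt e) (dg.getD (pvTgt e) 0 + 1) else dg) dg)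
    (PySem.Dict.ofList (keys.map (fun k => (k, (0 : Int)))))

-- body of 'for e in net[k]: t = e[1]; if t in alive: indeg[t] -= 1; if indeg[t] == 0: stack.append(t)'
def pvPeelStep1 (alive : PySem.Set String) (st : PySem.Dict String Int × List String)
    (e : List String) : PySem.Dict String Int × List String :=
  if PySem.Set.contains alive (pvTgt e) then
    let dg := st.1.insert (pvTgt e) (st.1.getD (pvTgt e) 0 - 1)
    if dg.getD (pvTgt e) 0 == 0 then (dg, st.2 ++ [pvTgt e]) else (dg, st.2)
  else st

-- while stack: k = stack.pop(); alive.discard(k); <inner loop>   (fuel bounds the pops)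
def pvPeel1 (net : PVNet) : Nat → PySem.Dict String Int → PySem.Set String → List String → PySem.Set String
  | 0, _, alive, _ => alive
  | fuel+1, dg, alive, stack =>
    match stack.getLast? with
    | none => alive
    | some k =>
      let alive' := PySem.Set.discard alive k
      let p := (pvGet net k).foldl (pvPeelStep1 alive') (dg, stack.dropLast)
      pvPeel1 net fuel p.1 alive' p.2

-- body of 'if e[1] in supp: supp[k] += 1; rev[e[1]].append(k)' (p = (k, e))
def pvSRStep (st : PySem.Dict String Int × PySem.Dict String (List String))
    (p : String × List String) : PySem.Dict String Int × PySem.Dict String (List String) :=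
  if st.1.contains (pvTgt p.2) then
    (st.1.insert p.1 (st.1.getD p.1 0 + 1),
     st.2.insert (pvTgt p.2) (st.2.getD (pvTgt p.2) [] ++ [p.1]))
  else st

-- the zero-initialised live-out-edge counter and the reverse adjacency dict over
-- alive1, filled by one pass over all edges (the two nested for-loops of Source B)
def pvSuppRevInit (net : PVNet) (alive1 : List String) :
    PySem.Dict String Int × PySem.Dict String (List String) :=
  alive1.foldl (fun st k => (pvGet net k).foldl (fun st e => pvSRStep st (k, e)) st)
    (PySem.Dict.ofList (alive1.map (fun k => (k, (0 : Int)))),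
     PySem.Dict.ofList (alive1.map (fun k => (k, ([] : List String)))))

-- body of 'for j in rev[t]: if j in core: supp[j] -= 1; if supp[j] == 0 and net[j]: stack.append(j)'
def pvPeelStep2 (net : PVNet) (core : PySem.Set String) (st : PySem.Dict String Int × List String)
    (j : String) : PySem.Dict String Int × List String :=
  if PySem.Set.contains core j then
    let sp := st.1.insert j (st.1.getD j 0 - 1)
    if sp.getD j 0 == 0 && !(pvGet net j).isEmpty then (sp, st.2 ++ [j]) else (sp, st.2)
  else st

-- while stack: t = stack.pop(); core.discard(t); <inner loop>
def pvPeel2 (net : PVNet) (rev : PySem.Dict String (List String)) :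
    Nat → PySem.Dict String Int → PySem.Set String → List String → PySem.Set String
  | 0, _, core, _ => core
  | fuel+1, sp, core, stack =>
    match stack.getLast? with
    | none => core
    | some t =>
      let core' := PySem.Set.discard core t
      let p := (rev.getD t []).foldl (pvPeelStep2 net core') (sp, stack.dropLast)
      pvPeel2 net rev fuel p.1 core' p.2

def ExtractCoreNetwork_alt (genes_network : List (String × List (List String))) : List (String × List (List String)) :=
  let d0 := (PySem.Dict.ofList genes_network).items
  let keys := d0.map Prod.fst
  let indeg := pvIndegInit d0 keys
  let alive := pvPeel1 d0 (keys.length + 1) indeg (PySem.Set.ofList keys)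
      (keys.filter (fun k => indeg.getD k 0 == 0))
  let alive1 := keys.filter (fun k => PySem.Set.contains alive k)
  let sr := pvSuppRevInit d0 alive1
  let core := pvPeel2 d0 sr.2 (alive1.length + 1) sr.1 (PySem.Set.ofList alive1)
      (alive1.filter (fun k => !(pvGet d0 k).isEmpty && sr.1.getD k 0 == 0))
  (keys.filter (fun k => PySem.Set.contains core k)).map
    (fun k => (k, (pvGet d0 k).filter (fun e => PySem.Set.contains core (pvTgt e))))

-- ===== PRECONDITION & SPEC =====
-- Pre_ excludes exactly the inputs on which the Python A raises IndexError: an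
-- interaction entry shorter than 2 elements makes A's `inter_target[1]` raise.
def Pre_ExtractCoreNetwork (genes_network : List (String × List (List String))) : Prop :=
  ∀ kv ∈ genes_network, ∀ e ∈ kv.2, 2 ≤ e.length
instance (genes_network : List (String × List (List String))) : Decidable (Pre_ExtractCoreNetwork genes_network) := by unfold Pre_ExtractCoreNetwork; infer_instance

def pvWitness_ExtractCoreNetwork : (List (String × List (List String))) :=
  [("a", [["+", "a"], ["-", "b"]]), ("b", [["+", "a"]])]

def Spec_ExtractCoreNetwork (genes_network : List (String × List (List String))) (out : List (String × List (List String))) : Prop := out = ExtractCoreNetwork_alt genes_network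
instance (genes_network : List (String × List (List String))) (out : List (String × List (List String))) : Decidable (Spec_ExtractCoreNetwork genes_network out) := by unfold Spec_ExtractCoreNetwork; infer_instance

-- ===== CLAIM (what is proved, stated in full; the proofs are below) =====
def Claim_equal_ExtractCoreNetwork : Prop := ∀ (genes_network : List (String × List (List String))), Dom_ExtractCoreNetwork genes_network → Pre_ExtractCoreNetwork genes_network → Spec_ExtractCoreNetwork genes_network (ExtractCoreNetwork genes_network)

-- ===== LEMMAS AND PROOFS =====
def pvKeys (st : PVNet) : List String := st.map Prod.fst

def pvGood (T : List String) (e : List String) : Bool := decide (pvTgt e ∈ T)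

-- k is supported as a root in T (someone in T targets it)
def pvSS1 (d0 : PVNet) (T : List String) : Prop :=
  ∀ k ∈ T, ∃ j ∈ T, ∃ e ∈ pvGet d0 j, pvTgt e = k

-- k is supported as a non-leaf in T
def pvSS2 (d0 : PVNet) (T : List String) : Prop :=
  ∀ k ∈ T, pvGet d0 k = [] ∨ ∃ e ∈ pvGet d0 k, pvTgt e ∈ T

-- number of edges out of the keys of S that target t
def pvE (net : PVNet) (S : List String) (t : String) : Nat :=
  (S.flatMap (fun j => pvGet net j)).countP (fun e => pvTgt e == t)

-- number of edges out of j that target a member of S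
def pvC (net : PVNet) (S : List String) (j : String) : Nat :=
  (pvGet net j).countP (fun e => decide (pvTgt e ∈ S))

-- ---------- assoc-list basics ----------
lemma pvGet_cons (hd : String × List (List String)) (tl : PVNet) (k : String) :
    pvGet (hd :: tl) k = if hd.1 = k then hd.2 else pvGet tl k := by
  by_cases h : hd.1 = k
  · simp [pvGet, List.find?, h]
  · have hb : (hd.1 == k) = false := by simp [h]
    simp [pvGet, List.find?, hb, h]

lemma pvGet_eq_of_mem {st : PVNet} (hnd : (pvKeys st).Nodup) {kv : String × List (List String)}
    (h : kv ∈ st) : pvGet st kv.1 = kv.2 := by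
  induction st with
  | nil => cases h
  | cons hd tl ih =>
    rw [List.mem_cons] at h
    rcases h with h | h
    · subst h; simp [pvGet_cons]
    · have hk : kv.1 ∈ pvKeys tl := List.mem_map_of_mem h
      have hnd2 : hd.1 ∉ pvKeys tl ∧ (pvKeys tl).Nodup := by
        rw [show pvKeys (hd :: tl) = hd.1 :: pvKeys tl from rfl] at hnd
        exact List.nodup_cons.mp hnd
      have hne : hd.1 ≠ kv.1 := fun he => hnd2.1 (he ▸ hk)
      rw [pvGet_cons, if_neg hne]
      exact ih hnd2.2 h

lemma pvGet_mem {st : PVNet} {k : String} (h : k ∈ pvKeys st) : (k, pvGet st k) ∈ st := by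
  induction st with
  | nil => simp [pvKeys] at h
  | cons hd tl ih =>
    by_cases he : hd.1 = k
    · rw [pvGet_cons, if_pos he]
      subst he
      exact List.mem_cons_self
    · have hk : k ∈ pvKeys tl := by
        simp only [pvKeys, List.map_cons, List.mem_cons] at h
        rcases h with h | h
        · exact absurd h.symm he
        · simpa [pvKeys] using h
      rw [pvGet_cons, if_neg he]
      exact List.mem_cons_of_mem _ (ih hk)

lemma pvGet_of_sublist {st d0 : PVNet} (hnd : (pvKeys d0).Nodup) (hs : st.Sublist d0)
    {kv : String × List (List String)} (h : kv ∈ st) : pvGet d0 kv.1 = kv.2 :=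
  pvGet_eq_of_mem hnd (hs.mem h)

lemma pvTargetList_eq (st : PVNet) : pvTargetList st = st.flatMap (fun kv => kv.2.map pvTgt) := by
  have inner : ∀ (l : List (List String)) (a : List String),
      l.foldl (fun a e => a ++ [pvTgt e]) a = a ++ l.map pvTgt := by
    intro l
    induction l with
    | nil => simp
    | cons x xs ih => intro a; simp [ih]
  have outer : ∀ (st : PVNet) (a : List String),
      st.foldl (fun acc kv => kv.2.foldl (fun a e => a ++ [pvTgt e]) acc) a =
        a ++ st.flatMap (fun kv => kv.2.map pvTgt) := by
    intro st
    induction st with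
    | nil => simp
    | cons kv rest ih => intro a; simp [inner, List.flatMap]
  simpa [pvTargetList] using outer st []

lemma mem_pvTargetList {st : PVNet} {x : String} :
    x ∈ pvTargetList st ↔ ∃ kv ∈ st, ∃ e ∈ kv.2, pvTgt e = x := by
  simp [pvTargetList_eq, List.mem_flatMap]

lemma pvFilter_erase {l : List (List String)} {x : List String} {p : List String → Bool}
    (hx : x ∈ l) (hp : p x = false) : (l.erase x).filter p = l.filter p := by
  obtain ⟨l₁, l₂, _, hl, he⟩ := List.exists_erase_eq hx
  subst hl
  simp [he, List.filter_append, hp]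

lemma pvFilter_mem_of_sublist {l s : List String} (h : s.Sublist l) (hn : l.Nodup) :
    l.filter (fun a => decide (a ∈ s)) = s := by
  induction h with
  | slnil => simp
  | @cons s' l' b hsl ih =>
    have hb : b ∉ s' := fun hb => (List.nodup_cons.mp hn).1 (hsl.mem hb)
    simp only [List.filter_cons]
    rw [if_neg (by simpa using hb)]
    exact ih hn.of_cons
  | @cons₂ s' l' b hsl ih =>
    have hb : b ∉ l' := (List.nodup_cons.mp hn).1
    simp only [List.filter_cons]
    rw [if_pos (by simp)]
    have heq : l'.filter (fun a => decide (a ∈ b :: s')) = l'.filter (fun a => decide (a ∈ s')) := by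
      apply List.filter_congr
      intro a ha
      have : a ≠ b := fun he => hb (he ▸ ha)
      simp [this]
    rw [heq, ih hn.of_cons]

lemma pvSublist_eq_of_mem_iff {l s t : List String} (hs : s.Sublist l) (ht : t.Sublist l)
    (hn : l.Nodup) (hm : ∀ a, a ∈ s ↔ a ∈ t) : s = t := by
  have h1 := pvFilter_mem_of_sublist hs hn
  have h2 := pvFilter_mem_of_sublist ht hn
  rw [← h1, ← h2]
  apply List.filter_congr
  intro a _
  simp [hm a]

lemma pvAssoc_det {st : PVNet} {f : String → List (List String)}
    (h : ∀ kv ∈ st, kv.2 = f kv.1) : st = (pvKeys st).map (fun k => (k, f k)) := by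
  induction st with
  | nil => rfl
  | cons kv rest ih =>
    have h1 := h kv List.mem_cons_self
    have h2 := ih (fun kv' h' => h kv' (List.mem_cons_of_mem _ h'))
    simp only [pvKeys, List.map_cons] at h2 ⊢
    rw [← h2]
    exact congrArg (· :: rest) (Prod.ext rfl h1)

-- decomposition of a nodup-keys assoc list at a member
lemma pvDecomp {st : PVNet} (hnd : (pvKeys st).Nodup) {source : String} {v : List (List String)}
    (h : (source, v) ∈ st) :
    ∃ pre suf, st = pre ++ (source, v) :: suf ∧ source ∉ pvKeys pre ∧ source ∉ pvKeys suf ∧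
      (∀ l', pvSet st source l' = pre ++ (source, l') :: suf) ∧
      pvErase st source = pre ++ suf := by
  obtain ⟨pre, suf, hst⟩ := List.append_of_mem h
  subst hst
  have hnd' := hnd
  simp only [pvKeys, List.map_append, List.map_cons] at hnd'
  have hdisj := (List.nodup_append.mp hnd').2.2
  have hpre : source ∉ pvKeys pre := by
    intro hmem
    simp only [pvKeys] at hmem
    have h3 := hdisj source hmem
    simp at h3
  have hsuf : source ∉ pvKeys suf := by
    have h2 := (List.nodup_append.mp hnd').2.1
    simpa [pvKeys] using (List.nodup_cons.mp h2).1
  refine ⟨pre, suf, rfl, hpre, hsuf, ?_, ?_⟩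
  · intro l'
    have hany : (pre ++ (source, v) :: suf).any (fun p => p.1 == source) = true := by simp
    simp only [pvSet, hany, if_pos, List.map_append, List.map_cons]
    have hmap : ∀ (m : PVNet), source ∉ pvKeys m →
        m.map (fun p => if (p.1 == source) = true then (source, l') else p) = m := by
      intro m hm
      refine (List.map_congr_left ?_).trans (List.map_id _)
      intro p hp
      have : p.1 ≠ source := fun he => hm (he ▸ List.mem_map_of_mem hp)
      simp [this]
    rw [hmap pre hpre, hmap suf hsuf]
    simp
  · simp only [pvErase, List.filter_append, List.filter_cons]
    rw [if_neg (by simp)]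
    have hf : ∀ (m : PVNet), source ∉ pvKeys m →
        m.filter (fun p => !(p.1 == source)) = m := by
      intro m hm
      apply List.filter_eq_self.mpr
      intro p hp
      have : p.1 ≠ source := fun he => hm (he ▸ List.mem_map_of_mem hp)
      simp [this]
    rw [hf pre hpre, hf suf hsuf]

lemma pvErase_sublist (st : PVNet) (k : String) : (pvErase st k).Sublist st :=
  List.filter_sublist

lemma mem_pvKeys_pvErase {st : PVNet} {k a : String} :
    a ∈ pvKeys (pvErase st k) ↔ a ∈ pvKeys st ∧ a ≠ k := by
  simp only [pvKeys, pvErase, List.mem_map]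
  constructor
  · rintro ⟨p, hp, rfl⟩
    have := List.of_mem_filter hp
    exact ⟨⟨p, List.mem_of_mem_filter hp, rfl⟩, by simpa using this⟩
  · rintro ⟨⟨p, hp, rfl⟩, hne⟩
    exact ⟨p, List.mem_filter.mpr ⟨hp, by simpa using hne⟩, rfl⟩

lemma pvErase_length_lt {st : PVNet} {k : String} (h : k ∈ pvKeys st) :
    (pvErase st k).length < st.length := by
  apply List.length_filter_lt_length_iff_exists.mpr
  simp only [pvKeys, List.mem_map] at h
  obtain ⟨p, hp, rfl⟩ := h
  exact ⟨p, hp, by simp⟩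

-- effect of pvSet / pvErase on lookups and keys
lemma pvGet_nil_of_not_mem {st : PVNet} {k : String} (h : k ∉ pvKeys st) : pvGet st k = [] := by
  have : st.find? (fun p => p.1 == k) = none := by
    apply List.find?_eq_none.mpr
    intro p hp
    simp only [Bool.not_eq_true, beq_eq_false_iff_ne, ne_eq]
    intro he
    exact h (he ▸ List.mem_map_of_mem (f := Prod.fst) hp)
  simp [pvGet, this]

lemma mem_pvErase_iff {st : PVNet} {k : String} {kv : String × List (List String)} :
    kv ∈ pvErase st k ↔ kv ∈ st ∧ kv.1 ≠ k := by
  simp [pvErase, List.mem_filter]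

lemma pvKeys_pvErase_sublist (st : PVNet) (k : String) :
    (pvKeys (pvErase st k)).Sublist (pvKeys st) :=
  List.Sublist.map Prod.fst (pvErase_sublist st k)

lemma pvKeys_pvSet_of_mem {st : PVNet} (hnd : (pvKeys st).Nodup) {source : String}
    {v l' : List (List String)} (h : (source, v) ∈ st) :
    pvKeys (pvSet st source l') = pvKeys st := by
  obtain ⟨pre, suf, hst, _, _, hset, _⟩ := pvDecomp hnd h
  rw [hset l', hst]
  simp [pvKeys]

lemma mem_pvSet_iff {st : PVNet} (hnd : (pvKeys st).Nodup) {source : String}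
    {v l' : List (List String)} (h : (source, v) ∈ st) {kv : String × List (List String)} :
    kv ∈ pvSet st source l' ↔ kv = (source, l') ∨ (kv ∈ st ∧ kv.1 ≠ source) := by
  obtain ⟨pre, suf, hst, hpre, hsuf, hset, _⟩ := pvDecomp hnd h
  rw [hset l']
  constructor
  · intro hm
    rw [List.mem_append, List.mem_cons] at hm
    rcases hm with hm | hm | hm
    · right
      refine ⟨hst ▸ List.mem_append_left _ hm, ?_⟩
      intro he
      exact hpre (he ▸ List.mem_map_of_mem hm)
    · left; exact hm
    · right
      refine ⟨hst ▸ List.mem_append_right _ (List.mem_cons_of_mem _ hm), ?_⟩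
      intro he
      exact hsuf (he ▸ List.mem_map_of_mem hm)
  · intro hm
    rcases hm with hm | ⟨hm, hne⟩
    · subst hm; exact List.mem_append_right _ List.mem_cons_self
    · rw [hst] at hm
      rw [List.mem_append, List.mem_cons] at hm
      rcases hm with hm | hm | hm
      · exact List.mem_append_left _ hm
      · exact absurd (congrArg Prod.fst hm) hne
      · exact List.mem_append_right _ (List.mem_cons_of_mem _ hm)

lemma pvGet_pvSet_self {st : PVNet} (hnd : (pvKeys st).Nodup) {source : String}
    {v l' : List (List String)} (h : (source, v) ∈ st) :
    pvGet (pvSet st source l') source = l' := by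
  have hk : pvKeys (pvSet st source l') = pvKeys st := pvKeys_pvSet_of_mem hnd h
  have hmem : (source, l') ∈ pvSet st source l' := (mem_pvSet_iff hnd h).mpr (Or.inl rfl)
  exact pvGet_eq_of_mem (hk ▸ hnd) hmem

lemma pvGet_pvSet_other {st : PVNet} (hnd : (pvKeys st).Nodup) {source : String}
    {v l' : List (List String)} (h : (source, v) ∈ st) {k : String} (hk : k ≠ source) :
    pvGet (pvSet st source l') k = pvGet st k := by
  have hkeys : pvKeys (pvSet st source l') = pvKeys st := pvKeys_pvSet_of_mem hnd h
  by_cases hm : k ∈ pvKeys st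
  · have h1 : (k, pvGet st k) ∈ st := pvGet_mem hm
    have h2 : (k, pvGet st k) ∈ pvSet st source l' :=
      (mem_pvSet_iff hnd h).mpr (Or.inr ⟨h1, hk⟩)
    exact pvGet_eq_of_mem (hkeys ▸ hnd) h2
  · rw [pvGet_nil_of_not_mem hm, pvGet_nil_of_not_mem (hkeys ▸ hm)]

lemma pvGet_pvErase_other {st : PVNet} (hnd : (pvKeys st).Nodup) {source k : String}
    (hk : k ≠ source) : pvGet (pvErase st source) k = pvGet st k := by
  by_cases hm : k ∈ pvKeys st
  · have h1 : (k, pvGet st k) ∈ st := pvGet_mem hm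
    have h2 : (k, pvGet st k) ∈ pvErase st source := mem_pvErase_iff.mpr ⟨h1, hk⟩
    exact pvGet_eq_of_mem ((pvKeys_pvErase_sublist st source).nodup hnd) h2
  · have hm' : k ∉ pvKeys (pvErase st source) := by
      intro hmm
      exact hm (mem_pvKeys_pvErase.mp hmm).1
    rw [pvGet_nil_of_not_mem hm, pvGet_nil_of_not_mem hm']

lemma pvEdgeCount_pvSet {st : PVNet} (hnd : (pvKeys st).Nodup) {source : String}
    {v l' : List (List String)} (h : (source, v) ∈ st) :
    pvEdgeCount (pvSet st source l') + v.length = pvEdgeCount st + l'.length := by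
  obtain ⟨pre, suf, hst, _, _, hset, _⟩ := pvDecomp hnd h
  rw [hset l', hst]
  simp [pvEdgeCount]
  omega

lemma pvEdgeCount_pvErase {st : PVNet} (hnd : (pvKeys st).Nodup) {source : String}
    {v : List (List String)} (h : (source, v) ∈ st) :
    pvEdgeCount (pvErase st source) + v.length = pvEdgeCount st := by
  obtain ⟨pre, suf, hst, _, _, _, herase⟩ := pvDecomp hnd h
  rw [herase, hst]
  simp [pvEdgeCount]
  omega

-- ---------- root phase, port A ----------
lemma pvNotMemT_of_not_targeted (d0 : PVNet) (hnd0 : (pvKeys d0).Nodup) {copy : PVNet}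
    (hsub : copy.Sublist d0) {T : List String} (hss : pvSS1 d0 T)
    (hT : ∀ a ∈ T, a ∈ pvKeys copy) {source : String}
    (hns : source ∉ pvTargetList copy) : source ∉ T := by
  intro hsT
  obtain ⟨j, hj, e, he, hte⟩ := hss source hsT
  have hjk : j ∈ pvKeys copy := hT j hj
  have hmem : (j, pvGet copy j) ∈ copy := pvGet_mem hjk
  have hge : pvGet d0 j = pvGet copy j := pvGet_of_sublist hnd0 hsub hmem
  exact hns (mem_pvTargetList.mpr ⟨(j, pvGet copy j), hmem, e, by rw [← hge]; exact he, hte⟩)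

lemma pvRootPass_main (d0 : PVNet) (hnd0 : (pvKeys d0).Nodup) :
    ∀ (snap copy : PVNet) (tset : PySem.Set String) (flag : Bool),
    copy.Sublist d0 → tset = PySem.Set.ofList (pvTargetList copy) →
    (pvRootPass snap copy tset flag).1.Sublist copy ∧
    (pvRootPass snap copy tset flag).2.1 = PySem.Set.ofList (pvTargetList (pvRootPass snap copy tset flag).1) ∧
    (∀ T, pvSS1 d0 T → (∀ a ∈ T, a ∈ pvKeys copy) → ∀ a ∈ T, a ∈ pvKeys (pvRootPass snap copy tset flag).1) ∧
    (flag = true → (pvRootPass snap copy tset flag).2.2 = true) ∧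
    ((pvRootPass snap copy tset flag).2.2 = false → (pvRootPass snap copy tset flag).1 = copy ∧
      ∀ kv ∈ snap, kv.1 ∈ pvTargetList copy) ∧
    (flag = false → (pvRootPass snap copy tset flag).2.2 = true →
      (∀ a ∈ snap.map Prod.fst, a ∈ pvKeys copy) → (pvRootPass snap copy tset flag).1.length < copy.length) := by
  intro snap
  induction snap with
  | nil =>
    intro copy tset flag hsub ht
    subst ht
    refine ⟨List.Sublist.refl _, rfl, fun T _ hT => hT, fun h => h, fun _ => ⟨rfl, by simp⟩, ?_⟩
    intro hf htr
    rw [hf] at htr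
    cases htr
  | cons hd rest ih =>
    intro copy tset flag hsub ht
    obtain ⟨source, dummy⟩ := hd
    subst ht
    by_cases hc : source ∈ pvTargetList copy
    · -- skipped item
      rw [show pvRootPass ((source, dummy) :: rest) copy (PySem.Set.ofList (pvTargetList copy)) flag =
            pvRootPass rest copy (PySem.Set.ofList (pvTargetList copy)) flag by
          simp [pvRootPass, hc]]
      obtain ⟨i1, i2, i3, i4, i5, i6⟩ := ih copy (PySem.Set.ofList (pvTargetList copy)) flag hsub rfl
      refine ⟨i1, i2, i3, i4, ?_, ?_⟩
      · intro hf
        obtain ⟨he, hall⟩ := i5 hf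
        exact ⟨he, by
          intro kv hkv
          rw [List.mem_cons] at hkv
          rcases hkv with hkv | hkv
          · subst hkv; exact hc
          · exact hall kv hkv⟩
      · intro hf htr hkeys
        exact i6 hf htr (fun a ha => hkeys a (by simp [ha]))
    · -- removed item
      have hstep : pvRootPass ((source, dummy) :: rest) copy (PySem.Set.ofList (pvTargetList copy)) flag =
          pvRootPass rest (pvErase copy source)
            (PySem.Set.ofList (pvTargetList (pvErase copy source))) true := by
        simp [pvRootPass, hc]
      rw [hstep]
      have hsub' : (pvErase copy source).Sublist d0 := (pvErase_sublist copy source).trans hsub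
      obtain ⟨i1, i2, i3, i4, i5, i6⟩ := ih (pvErase copy source)
        (PySem.Set.ofList (pvTargetList (pvErase copy source))) true hsub' rfl
      have hflag := i4 rfl
      refine ⟨i1.trans (pvErase_sublist copy source), i2, ?_, fun _ => hflag,
        fun hf => absurd hflag (by simp [hf]), ?_⟩
      · intro T hss hT a ha
        have hnsT : source ∉ T := pvNotMemT_of_not_targeted d0 hnd0 hsub hss hT hc
        apply i3 T hss
        intro b hb
        exact mem_pvKeys_pvErase.mpr ⟨hT b hb, fun he => hnsT (he ▸ hb)⟩
        exact ha
      · intro _ _ hkeys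
        have hsk : source ∈ pvKeys copy := hkeys source (by simp)
        have h1 : (pvErase copy source).length < copy.length := pvErase_length_lt hsk
        have h2 := i1.length_le
        omega
lemma pvRootLoop_main (d0 : PVNet) (hnd0 : (pvKeys d0).Nodup) :
    ∀ (fuel : Nat) (copy : PVNet) (tset : PySem.Set String),
    copy.Sublist d0 → tset = PySem.Set.ofList (pvTargetList copy) → copy.length < fuel →
    (pvRootLoop fuel copy tset).Sublist copy ∧
    (∀ T, pvSS1 d0 T → (∀ a ∈ T, a ∈ pvKeys copy) → ∀ a ∈ T, a ∈ pvKeys (pvRootLoop fuel copy tset)) ∧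
    pvSS1 d0 (pvKeys (pvRootLoop fuel copy tset)) := by
  intro fuel
  induction fuel with
  | zero => intro copy tset _ _ h; omega
  | succ fuel ih =>
    intro copy tset hsub ht hlen
    obtain ⟨p1, p2, p3, _, p5, p6⟩ := pvRootPass_main d0 hnd0 copy copy tset false hsub ht
    rcases hr : pvRootPass copy copy tset false with ⟨copy', tset', flag⟩
    rw [hr] at p1 p2 p3 p5 p6
    simp only at p1 p2 p3 p5 p6
    cases flag with
    | false =>
      obtain ⟨heq, hall⟩ := p5 rfl
      have hres : pvRootLoop (fuel + 1) copy tset = copy' := by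
        simp [pvRootLoop, hr]
      rw [hres, heq]
      refine ⟨List.Sublist.refl _, fun T hss hT => hT, ?_⟩
      intro k hk
      have hkv : (k, pvGet copy k) ∈ copy := pvGet_mem hk
      have := hall (k, pvGet copy k) hkv
      obtain ⟨kv', hkv', e, he, hte⟩ := mem_pvTargetList.mp this
      refine ⟨kv'.1, List.mem_map_of_mem hkv', e, ?_, hte⟩
      rw [pvGet_of_sublist hnd0 hsub hkv']
      exact he
    | true =>
      have hres : pvRootLoop (fuel + 1) copy tset = pvRootLoop fuel copy' tset' := by
        simp [pvRootLoop, hr]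
      rw [hres]
      have hlt : copy'.length < copy.length := p6 (by trivial) (by trivial) (fun a ha => ha)
      obtain ⟨q1, q2, q3⟩ := ih copy' tset' (p1.trans hsub) p2 (by omega)
      refine ⟨q1.trans p1, ?_, q3⟩
      intro T hss hT
      exact q2 T hss (p3 T hss hT)

-- ---------- leaf phase, port A ----------
lemma pvLeafInner_step_skip (snapKeys : List String) (source : String)
    {l : List (List String)} {i : Nat} (copy : PVNet) (flag : Bool) (h : i < l.length)
    (hc : snapKeys.contains (pvTgt l[i]) = true) :
    pvLeafInner snapKeys source l i copy flag = pvLeafInner snapKeys source l (i+1) copy flag := by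
  rw [pvLeafInner]
  simp only [h, dif_pos, hc, if_pos]

lemma pvLeafInner_step_remove (snapKeys : List String) (source : String)
    {l : List (List String)} {i : Nat} (copy : PVNet) (flag : Bool) (h : i < l.length)
    (hc : ¬ snapKeys.contains (pvTgt l[i]) = true) :
    pvLeafInner snapKeys source l i copy flag =
      pvLeafInner snapKeys source (l.erase l[i]) (i+1)
        (if (l.erase l[i]).isEmpty then pvErase copy source else pvSet copy source (l.erase l[i])) true := by
  rw [pvLeafInner]
  simp only [h, dif_pos, hc]
  rw [PySem.List.remove?_eq_some_erase l l[i] (List.getElem_mem h)]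
  rfl

lemma pvLeafInner_base (snapKeys : List String) (source : String)
    {l : List (List String)} {i : Nat} (copy : PVNet) (flag : Bool) (h : ¬ i < l.length) :
    pvLeafInner snapKeys source l i copy flag = (copy, flag) := by
  rw [pvLeafInner]
  simp [h]

lemma pvLeafInner_main (d0 : PVNet) (hnd0 : (pvKeys d0).Nodup) (snapKeys : List String)
    (source : String) :
    ∀ (l : List (List String)) (i : Nat) (copy : PVNet) (flag : Bool),
    (pvKeys copy).Sublist (pvKeys d0) →
    (∀ kv ∈ copy, kv.2.Sublist (pvGet d0 kv.1)) →
    (∀ kv ∈ copy, kv.2 = [] → pvGet d0 kv.1 = []) →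
    (source, l) ∈ copy →
    ((pvKeys (pvLeafInner snapKeys source l i copy flag).1).Sublist (pvKeys copy)) ∧
    (∀ kv ∈ (pvLeafInner snapKeys source l i copy flag).1, kv.2.Sublist (pvGet d0 kv.1)) ∧
    (∀ kv ∈ (pvLeafInner snapKeys source l i copy flag).1, kv.2 = [] → pvGet d0 kv.1 = []) ∧
    (∀ k, k ≠ source → ((k ∈ pvKeys (pvLeafInner snapKeys source l i copy flag).1 ↔ k ∈ pvKeys copy) ∧
        pvGet (pvLeafInner snapKeys source l i copy flag).1 k = pvGet copy k)) ∧
    (∀ T, pvSS2 d0 T → (∀ a ∈ T, a ∈ snapKeys) → (∀ a ∈ T, a ∈ pvKeys copy) →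
      (∀ k ∈ T, (pvGet copy k).filter (pvGood T) = (pvGet d0 k).filter (pvGood T)) →
      (∀ a ∈ T, a ∈ pvKeys (pvLeafInner snapKeys source l i copy flag).1) ∧
      (∀ k ∈ T, (pvGet (pvLeafInner snapKeys source l i copy flag).1 k).filter (pvGood T) =
        (pvGet d0 k).filter (pvGood T))) ∧
    (pvEdgeCount (pvLeafInner snapKeys source l i copy flag).1 ≤ pvEdgeCount copy) ∧
    ((pvLeafInner snapKeys source l i copy flag).2 = true → flag = true ∨
      pvEdgeCount (pvLeafInner snapKeys source l i copy flag).1 < pvEdgeCount copy) ∧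
    (flag = true → (pvLeafInner snapKeys source l i copy flag).2 = true) ∧
    ((pvLeafInner snapKeys source l i copy flag).2 = false →
      (pvLeafInner snapKeys source l i copy flag).1 = copy ∧ ∀ e ∈ l.drop i, pvTgt e ∈ snapKeys) := by
  intro l i copy flag
  induction l, i, copy, flag using pvLeafInner.induct snapKeys source with
  | case3 l i copy flag h =>
    intro hkeys hvals hnil hsrc
    rw [pvLeafInner_base snapKeys source copy flag h]
    refine ⟨List.Sublist.refl _, hvals, hnil, fun k _ => ⟨Iff.rfl, rfl⟩,
      fun T _ _ hTk hfe => ⟨hTk, hfe⟩, le_refl _, fun ht => Or.inl ht, fun hf => hf, ?_⟩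
    intro _
    refine ⟨rfl, ?_⟩
    rw [List.drop_eq_nil_of_le (by omega)]
    intro e he
    cases he
  | case1 l i copy flag h x hc ih =>
    intro hkeys hvals hnil hsrc
    rw [pvLeafInner_step_skip snapKeys source copy flag h hc]
    obtain ⟨i1, i2, i3, i4, i5, i6, i7, i8, i9⟩ := ih hkeys hvals hnil hsrc
    refine ⟨i1, i2, i3, i4, i5, i6, i7, i8, ?_⟩
    intro hf
    obtain ⟨he, hall⟩ := i9 hf
    refine ⟨he, ?_⟩
    rw [List.drop_eq_getElem_cons h]
    intro e hme
    rw [List.mem_cons] at hme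
    rcases hme with hme | hme
    · subst hme
      simpa using hc
    · exact hall e hme
  | case2 l i copy flag h x hc lA cA ih =>
    intro hkeys hvals hnil hsrc
    have hndc : (pvKeys copy).Nodup := hkeys.nodup hnd0
    have hx : l[i] ∈ l := List.getElem_mem h
    have hgetl : pvGet copy source = l := pvGet_eq_of_mem hndc hsrc
    have hlA : lA = l.erase l[i] := by
      show (PySem.List.remove? l x).getD l = l.erase l[i]
      rw [PySem.List.remove?_eq_some_erase l l[i] hx]
      rfl
    have hcA : cA = if (l.erase l[i]).isEmpty then pvErase copy source else pvSet copy source (l.erase l[i]) := by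
      show (if h : lA.isEmpty = true then pvErase copy source else pvSet copy source lA) = _
      rw [hlA, dite_eq_ite]
    rw [hlA] at ih
    rw [hcA] at ih
    clear hlA hcA
    rw [pvLeafInner_step_remove snapKeys source copy flag h hc]
    by_cases hemp : (l.erase l[i]).isEmpty
    · -- the whole list emptied: the entry is popped and the inner loop stops
      have hnil' : l.erase l[i] = [] := List.isEmpty_iff.mp hemp
      have hl1 : l = [l[i]] := by
        have hlen := List.length_erase_of_mem hx
        rw [hnil'] at hlen
        simp only [List.length_nil] at hlen
        have hlen1 : l.length = 1 := by omega
        have hi0 : i = 0 := by omega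
        subst hi0
        obtain ⟨a, ha⟩ := List.length_eq_one_iff.mp hlen1
        subst ha
        rfl
      rw [if_pos hemp]
      rw [pvLeafInner_base snapKeys source _ true (by simp [hnil'])]
      have hsrc_notT : ∀ T, pvSS2 d0 T → (∀ a ∈ T, a ∈ snapKeys) →
          (∀ k ∈ T, (pvGet copy k).filter (pvGood T) = (pvGet d0 k).filter (pvGood T)) →
          source ∉ T := by
        intro T hss hTs hfe hsT
        rcases hss source hsT with hd0nil | ⟨e, hed, hteT⟩
        · have : l.Sublist (pvGet d0 source) := hvals (source, l) hsrc
          rw [hd0nil] at this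
          rw [List.sublist_nil.mp this] at h
          cases h
        · have hge : (pvGet d0 source).filter (pvGood T) ≠ [] := by
            intro hcon
            have : pvGood T e = true := by simp [pvGood, hteT]
            have := List.mem_filter.mpr ⟨hed, this⟩
            rw [hcon] at this
            cases this
          have hfl : (pvGet copy source).filter (pvGood T) ≠ [] := by
            rw [hfe source hsT]; exact hge
          rw [hgetl, hl1] at hfl
          have hgx : pvGood T l[i] = true := by
            rcases List.filter_eq_nil_iff.not.mp hfl with _
            by_contra hgf
            apply hfl
            apply List.filter_eq_nil_iff.mpr
            intro a ha
            rw [List.mem_singleton] at ha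
            subst ha
            simpa using hgf
          have : pvTgt l[i] ∈ T := by simpa [pvGood] using hgx
          exact hc (by simpa using hTs _ this)
      refine ⟨pvKeys_pvErase_sublist copy source, ?_, ?_, ?_, ?_, ?_, ?_, fun _ => rfl, ?_⟩
      · intro kv hkv
        exact hvals kv (mem_pvErase_iff.mp hkv).1
      · intro kv hkv
        exact hnil kv (mem_pvErase_iff.mp hkv).1
      · intro k hk
        exact ⟨⟨fun hm => (mem_pvKeys_pvErase.mp hm).1, fun hm => mem_pvKeys_pvErase.mpr ⟨hm, hk⟩⟩,
          pvGet_pvErase_other hndc hk⟩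
      · intro T hss hTs hTk hfe
        have hnT := hsrc_notT T hss hTs hfe
        constructor
        · intro a ha
          exact mem_pvKeys_pvErase.mpr ⟨hTk a ha, by intro he; subst he; exact hnT ha⟩
        · intro k hk
          rw [pvGet_pvErase_other hndc (by intro he; subst he; exact hnT hk)]
          exact hfe k hk
      · show pvEdgeCount (pvErase copy source) ≤ pvEdgeCount copy
        have := pvEdgeCount_pvErase hndc hsrc
        omega
      · intro _
        right
        show pvEdgeCount (pvErase copy source) < pvEdgeCount copy
        have := pvEdgeCount_pvErase hndc hsrc
        have hlpos : 0 < l.length := by omega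
        omega
      · intro hfalse
        cases hfalse
    · -- one edge removed, entry updated, loop continues
      rw [if_neg hemp]
      have hL : (l.erase l[i]).Sublist (pvGet d0 source) :=
        (List.erase_sublist).trans (hvals (source, l) hsrc)
      have hkeys' : pvKeys (pvSet copy source (l.erase l[i])) = pvKeys copy :=
        pvKeys_pvSet_of_mem hndc hsrc
      have hndc' : (pvKeys (pvSet copy source (l.erase l[i]))).Nodup := hkeys' ▸ hndc
      have hsrc' : (source, l.erase l[i]) ∈ pvSet copy source (l.erase l[i]) :=
        (mem_pvSet_iff hndc hsrc).mpr (Or.inl rfl)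
      rw [if_neg hemp] at ih
      obtain ⟨i1, i2, i3, i4, i5, i6, i7, i8, i9⟩ := ih
        (by rw [hkeys']; exact hkeys)
        (by
          intro kv hkv
          rcases (mem_pvSet_iff hndc hsrc).mp hkv with hkv | ⟨hkv, _⟩
          · subst hkv; exact hL
          · exact hvals kv hkv)
        (by
          intro kv hkv hkvnil
          rcases (mem_pvSet_iff hndc hsrc).mp hkv with hkv | ⟨hkv, _⟩
          · subst hkv
            exact absurd (List.isEmpty_iff.mpr hkvnil) hemp
          · exact hnil kv hkv hkvnil)
        hsrc'
      have hec : pvEdgeCount (pvSet copy source (l.erase l[i])) < pvEdgeCount copy := by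
        have h1 := pvEdgeCount_pvSet (l' := l.erase l[i]) hndc hsrc
        have h2 := List.length_erase_of_mem hx
        omega
      refine ⟨by rw [hkeys'] at i1; exact i1, i2, i3, ?_, ?_, by omega, fun _ => by right; omega,
        fun _ => i8 rfl, ?_⟩
      · intro k hk
        obtain ⟨hm, hg⟩ := i4 k hk
        rw [hkeys'] at hm
        rw [pvGet_pvSet_other hndc hsrc hk] at hg
        exact ⟨hm, hg⟩
      · intro T hss hTs hTk hfe
        apply i5 T hss hTs (by rw [hkeys']; exact hTk)
        intro k hk
        by_cases hks : k = source
        · subst hks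
          rw [pvGet_pvSet_self hndc hsrc]
          have hgoodx : pvGood T l[i] = false := by
            simp only [pvGood, decide_eq_false_iff_not]
            intro hmem
            exact hc (by simpa using hTs _ hmem)
          rw [pvFilter_erase hx hgoodx, ← hgetl]
          exact hfe k hk
        · rw [pvGet_pvSet_other hndc hsrc hks]
          exact hfe k hk
      · intro hf
        have := i8 rfl
        rw [hf] at this
        cases this

lemma pvLeafPass_main (d0 : PVNet) (hnd0 : (pvKeys d0).Nodup) (snapKeys : List String) :
    ∀ (snap : List (String × List (List String))) (copy : PVNet) (flag : Bool),
    (pvKeys copy).Sublist (pvKeys d0) →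
    (∀ kv ∈ copy, kv.2.Sublist (pvGet d0 kv.1)) →
    (∀ kv ∈ copy, kv.2 = [] → pvGet d0 kv.1 = []) →
    (∀ kv ∈ snap, kv ∈ copy) → (snap.map Prod.fst).Nodup →
    ((pvKeys (pvLeafPass snapKeys snap copy flag).1).Sublist (pvKeys copy)) ∧
    (∀ kv ∈ (pvLeafPass snapKeys snap copy flag).1, kv.2.Sublist (pvGet d0 kv.1)) ∧
    (∀ kv ∈ (pvLeafPass snapKeys snap copy flag).1, kv.2 = [] → pvGet d0 kv.1 = []) ∧
    (∀ T, pvSS2 d0 T → (∀ a ∈ T, a ∈ snapKeys) → (∀ a ∈ T, a ∈ pvKeys copy) →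
      (∀ k ∈ T, (pvGet copy k).filter (pvGood T) = (pvGet d0 k).filter (pvGood T)) →
      (∀ a ∈ T, a ∈ pvKeys (pvLeafPass snapKeys snap copy flag).1) ∧
      (∀ k ∈ T, (pvGet (pvLeafPass snapKeys snap copy flag).1 k).filter (pvGood T) =
        (pvGet d0 k).filter (pvGood T))) ∧
    (pvEdgeCount (pvLeafPass snapKeys snap copy flag).1 ≤ pvEdgeCount copy) ∧
    ((pvLeafPass snapKeys snap copy flag).2 = true → flag = true ∨
      pvEdgeCount (pvLeafPass snapKeys snap copy flag).1 < pvEdgeCount copy) ∧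
    (flag = true → (pvLeafPass snapKeys snap copy flag).2 = true) ∧
    ((pvLeafPass snapKeys snap copy flag).2 = false →
      (pvLeafPass snapKeys snap copy flag).1 = copy ∧ ∀ kv ∈ snap, ∀ e ∈ kv.2, pvTgt e ∈ snapKeys) := by
  intro snap
  induction snap with
  | nil =>
    intro copy flag hkeys hvals hnil _ _
    refine ⟨List.Sublist.refl _, hvals, hnil, fun T _ _ hTk hfe => ⟨hTk, hfe⟩, le_refl _,
      fun ht => Or.inl ht, fun hf => hf, fun _ => ⟨rfl, by simp⟩⟩
  | cons hd rest ih =>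
    intro copy flag hkeys hvals hnil hsnap hsnd
    obtain ⟨source, targets⟩ := hd
    have hndc : (pvKeys copy).Nodup := hkeys.nodup hnd0
    have hsrc : (source, targets) ∈ copy := hsnap _ List.mem_cons_self
    obtain ⟨a1, a2, a3, a4, a5, a6, a7, a8, a9⟩ :=
      pvLeafInner_main d0 hnd0 snapKeys source targets 0 copy flag hkeys hvals hnil hsrc
    rcases hinner : pvLeafInner snapKeys source targets 0 copy flag with ⟨copy', flag'⟩
    rw [hinner] at a1 a2 a3 a4 a5 a6 a7 a8 a9
    simp only at a1 a2 a3 a4 a5 a6 a7 a8 a9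
    have hstep : pvLeafPass snapKeys ((source, targets) :: rest) copy flag =
        pvLeafPass snapKeys rest copy' flag' := by
      simp [pvLeafPass, hinner]
    rw [hstep]
    have hsnd' : (rest.map Prod.fst).Nodup := by
      simp only [List.map_cons] at hsnd
      exact hsnd.of_cons
    have hsns : source ∉ rest.map Prod.fst := by
      simp only [List.map_cons] at hsnd
      exact (List.nodup_cons.mp hsnd).1
    have hsnap' : ∀ kv ∈ rest, kv ∈ copy' := by
      intro kv hkv
      have hne : kv.1 ≠ source := by
        intro he
        exact hsns (he ▸ List.mem_map_of_mem hkv)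
      have hkvc : kv ∈ copy := hsnap kv (List.mem_cons_of_mem _ hkv)
      have hkm : kv.1 ∈ pvKeys copy := List.mem_map_of_mem hkvc
      have hkm' : kv.1 ∈ pvKeys copy' := ((a4 kv.1 hne).1).mpr hkm
      have hgv : pvGet copy' kv.1 = kv.2 := by
        rw [(a4 kv.1 hne).2]
        exact pvGet_eq_of_mem hndc hkvc
      have := pvGet_mem hkm'
      rw [hgv] at this
      exact this
    obtain ⟨b1, b2, b3, b4, b5, b6, b7, b8⟩ := ih copy' flag' (a1.trans hkeys) a2 a3 hsnap' hsnd'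
    refine ⟨b1.trans a1, b2, b3, ?_, by omega, ?_, ?_, ?_⟩
    · intro T hss hTs hTk hfe
      obtain ⟨c1, c2⟩ := a5 T hss hTs hTk hfe
      exact b4 T hss hTs c1 c2
    · intro hr
      rcases b6 hr with hfl' | hlt
      · rcases a7 hfl' with hfl | hlt2
        · exact Or.inl hfl
        · exact Or.inr (by omega)
      · exact Or.inr (by omega)
    · intro hf
      exact b7 (a8 hf)
    · intro hr
      have hfl' : flag' = false := by
        by_contra hne
        rw [(b7 (Bool.of_not_eq_false hne ▸ rfl) : _)] at hr
        cases hr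
      subst hfl'
      obtain ⟨he', hedges'⟩ := a9 rfl
      subst he'
      obtain ⟨he, hrest⟩ := b8 hr
      refine ⟨he, ?_⟩
      intro kv hkv
      rw [List.mem_cons] at hkv
      rcases hkv with hkv | hkv
      · subst hkv
        intro e hee
        exact hedges' e (by simpa using hee)
      · exact hrest kv hkv

lemma pvLeafLoop_main (d0 : PVNet) (hnd0 : (pvKeys d0).Nodup) :
    ∀ (fuel : Nat) (copy : PVNet),
    (pvKeys copy).Sublist (pvKeys d0) →
    (∀ kv ∈ copy, kv.2.Sublist (pvGet d0 kv.1)) →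
    (∀ kv ∈ copy, kv.2 = [] → pvGet d0 kv.1 = []) →
    pvEdgeCount copy < fuel →
    ((pvKeys (pvLeafLoop fuel copy)).Sublist (pvKeys copy)) ∧
    (∀ kv ∈ pvLeafLoop fuel copy, kv.2.Sublist (pvGet d0 kv.1)) ∧
    (∀ kv ∈ pvLeafLoop fuel copy, kv.2 = [] → pvGet d0 kv.1 = []) ∧
    (∀ T, pvSS2 d0 T → (∀ a ∈ T, a ∈ pvKeys copy) →
      (∀ k ∈ T, (pvGet copy k).filter (pvGood T) = (pvGet d0 k).filter (pvGood T)) →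
      (∀ a ∈ T, a ∈ pvKeys (pvLeafLoop fuel copy)) ∧
      (∀ k ∈ T, (pvGet (pvLeafLoop fuel copy) k).filter (pvGood T) =
        (pvGet d0 k).filter (pvGood T))) ∧
    (∀ kv ∈ pvLeafLoop fuel copy, ∀ e ∈ kv.2, pvTgt e ∈ pvKeys (pvLeafLoop fuel copy)) := by
  intro fuel
  induction fuel with
  | zero => intro copy _ _ _ h; omega
  | succ fuel ih =>
    intro copy hkeys hvals hnil hfuel
    have hndc : (pvKeys copy).Nodup := hkeys.nodup hnd0
    obtain ⟨b1, b2, b3, b4, b5, b6, b7, b8⟩ :=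
      pvLeafPass_main d0 hnd0 (copy.map Prod.fst) copy copy false hkeys hvals hnil
        (fun kv hkv => hkv) hndc
    rcases hpass : pvLeafPass (copy.map Prod.fst) copy copy false with ⟨copy', flag⟩
    rw [hpass] at b1 b2 b3 b4 b5 b6 b7 b8
    simp only at b1 b2 b3 b4 b5 b6 b7 b8
    cases flag with
    | false =>
      obtain ⟨heq, hall⟩ := b8 rfl
      have hres : pvLeafLoop (fuel + 1) copy = copy' := by
        simp [pvLeafLoop, hpass]
      rw [hres, heq]
      refine ⟨List.Sublist.refl _, hvals, hnil, fun T _ hTk hfe => ⟨hTk, hfe⟩, ?_⟩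
      intro kv hkv e he
      exact hall kv hkv e he
    | true =>
      have hres : pvLeafLoop (fuel + 1) copy = pvLeafLoop fuel copy' := by
        simp [pvLeafLoop, hpass]
      rw [hres]
      have hlt : pvEdgeCount copy' < pvEdgeCount copy := by
        rcases b6 rfl with hcon | hlt
        · cases hcon
        · exact hlt
      obtain ⟨q1, q2, q3, q4, q5⟩ := ih copy' (b1.trans hkeys) b2 b3 (by omega)
      refine ⟨q1.trans b1, q2, q3, ?_, q5⟩
      intro T hss hTk hfe
      obtain ⟨c1, c2⟩ := b4 T hss hTk hTk hfe
      exact q4 T hss c1 c2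

-- ---------- counting facts for port B ----------
lemma pvE_pos_iff {net : PVNet} {S : List String} {t : String} :
    0 < pvE net S t ↔ ∃ j ∈ S, ∃ e ∈ pvGet net j, pvTgt e = t := by
  simp [pvE, List.countP_pos_iff, List.mem_flatMap]
  tauto

lemma pvE_mono {net : PVNet} {T S : List String} (hnd : T.Nodup) (hsub : ∀ a ∈ T, a ∈ S)
    (t : String) : pvE net T t ≤ pvE net S t := by
  have hsp : T.Subperm S := hnd.subperm hsub
  obtain ⟨T', hperm, hsl⟩ := hsp
  have h1 : (T'.flatMap (fun j => pvGet net j)).Perm (T.flatMap (fun j => pvGet net j)) :=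
    hperm.flatMap (fun a _ => List.Perm.refl _)
  have h2 : (T'.flatMap (fun j => pvGet net j)).Sublist (S.flatMap (fun j => pvGet net j)) :=
    hsl.flatMap _
  unfold pvE
  rw [← h1.countP_eq]
  exact h2.countP_le

lemma pvE_discard {net : PVNet} {S : List String} (hnd : S.Nodup) {k : String} (hk : k ∈ S)
    (t : String) :
    pvE net S t = pvE net (PySem.Set.discard S k) t + (pvGet net k).countP (fun e => pvTgt e == t) := by
  have hperm : S.Perm (k :: PySem.Set.discard S k) := by
    have hd : PySem.Set.discard S k = S.erase k := by
      rw [List.Nodup.erase_eq_filter hnd]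
      rfl
    rw [hd]
    exact List.perm_cons_erase hk
  have h1 : (S.flatMap (fun j => pvGet net j)).Perm
      ((k :: PySem.Set.discard S k).flatMap (fun j => pvGet net j)) :=
    hperm.flatMap (fun a _ => List.Perm.refl _)
  unfold pvE
  rw [h1.countP_eq, List.flatMap_cons, List.countP_append]
  omega

lemma pvC_mono {net : PVNet} {T S : List String} (hsub : ∀ a ∈ T, a ∈ S) (j : String) :
    pvC net T j ≤ pvC net S j := by
  apply List.countP_mono_left
  intro e _
  simp only [decide_eq_true_eq]
  exact fun h => hsub _ h

lemma pvC_pos_iff {net : PVNet} {S : List String} {j : String} :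
    0 < pvC net S j ↔ ∃ e ∈ pvGet net j, pvTgt e ∈ S := by
  simp [pvC, List.countP_pos_iff]

lemma pvC_discard {net : PVNet} {S : List String} {t : String} (ht : t ∈ S) (j : String) :
    pvC net S j = pvC net (PySem.Set.discard S t) j + (pvGet net j).countP (fun e => pvTgt e == t) := by
  unfold pvC
  induction pvGet net j with
  | nil => simp
  | cons e l ih =>
    simp only [List.countP_cons]
    by_cases he : pvTgt e = t
    · have h1 : decide (pvTgt e ∈ S) = true := by simp [he, ht]
      have h2 : decide (pvTgt e ∈ PySem.Set.discard S t) = false := by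
        simp [PySem.Set.mem_discard, he]
      have h3 : (pvTgt e == t) = true := by simp [he]
      rw [h1, h2, h3, ih]
      simp
      omega
    · have h3 : (pvTgt e == t) = false := by simp [he]
      have h2 : decide (pvTgt e ∈ PySem.Set.discard S t) = decide (pvTgt e ∈ S) := by
        by_cases hm : pvTgt e ∈ S
        · simp [PySem.Set.mem_discard, hm, he]
        · simp [PySem.Set.mem_discard, hm]
      rw [h2, h3, ih]
      simp
      omega

lemma pvDiscard_length_lt {S : List String} {k : String} (hk : k ∈ S) :
    (PySem.Set.discard S k).length < S.length := by
  apply List.length_filter_lt_length_iff_exists.mpr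
  exact ⟨k, hk, by simp⟩

-- ---------- the constant-valued dict {k: c for k in xs} ----------
lemma pvConstDict_aux {ν : Type} (xs : List String) (c : ν) :
    ∀ (d : PySem.Dict String ν),
      (∀ t dflt, ((xs.map (fun k => (k, c))).foldl (fun d p => d.insert p.1 p.2) d).getD t dflt
        = if t ∈ xs then c else d.getD t dflt) ∧
      (∀ t, ((xs.map (fun k => (k, c))).foldl (fun d p => d.insert p.1 p.2) d).contains t
        = (decide (t ∈ xs) || d.contains t)) := by
  induction xs with
  | nil => intro d; simp
  | cons x xs ih =>
    intro d
    simp only [List.map_cons, List.foldl_cons]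
    obtain ⟨ih1, ih2⟩ := ih (d.insert x c)
    constructor
    · intro t dflt
      rw [ih1 t dflt, PySem.Dict.getD_insert]
      by_cases h1 : t ∈ xs
      · simp [h1]
      · by_cases h2 : t = x <;> simp [h1, h2]
    · intro t
      rw [ih2 t, PySem.Dict.contains_insert]
      by_cases h1 : t ∈ xs
      · simp [h1]
      · by_cases h2 : t = x <;> simp [h1, h2]

lemma pvConstDict_getD {ν : Type} (xs : List String) (c dflt : ν) (t : String) :
    (PySem.Dict.ofList (xs.map (fun k => (k, c)))).getD t dflt = if t ∈ xs then c else dflt := by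
  have := (pvConstDict_aux xs c PySem.Dict.empty).1 t dflt
  simpa [PySem.Dict.getD_empty] using this

lemma pvConstDict_contains {ν : Type} (xs : List String) (c : ν) (t : String) :
    (PySem.Dict.ofList (xs.map (fun k => (k, c)))).contains t = decide (t ∈ xs) := by
  have := (pvConstDict_aux xs c PySem.Dict.empty).2 t
  simpa [PySem.Dict.contains_empty] using this

-- ---------- the in-degree counter build ----------
lemma pvCnt1_fold (C : String → Bool) :
    ∀ (L : List (List String)) (dg : PySem.Dict String Int), (∀ x, dg.contains x = C x) →
    (∀ x, (L.foldl (fun dg e =>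
        if dg.contains (pvTgt e) then dg.insert (pvTgt e) (dg.getD (pvTgt e) 0 + 1) else dg) dg).contains x = C x) ∧
    (∀ t, (L.foldl (fun dg e =>
        if dg.contains (pvTgt e) then dg.insert (pvTgt e) (dg.getD (pvTgt e) 0 + 1) else dg) dg).getD t 0
      = dg.getD t 0 + (if C t then ((L.countP (fun e => pvTgt e == t)) : Int) else 0)) := by
  intro L
  induction L with
  | nil =>
    intro dg h
    refine ⟨h, ?_⟩
    intro t
    simp
  | cons e L ih =>
    intro dg h
    simp only [List.foldl_cons]
    by_cases hc : C (pvTgt e) = true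
    · rw [if_pos (by rw [h]; exact hc)]
      have hc' : ∀ x, (dg.insert (pvTgt e) (dg.getD (pvTgt e) 0 + 1)).contains x = C x := by
        intro x
        rw [PySem.Dict.contains_insert]
        by_cases hx : x = pvTgt e
        · simp [hx, hc]
        · simp [hx, h x]
      obtain ⟨ih1, ih2⟩ := ih _ hc'
      refine ⟨ih1, ?_⟩
      intro t
      rw [ih2 t, PySem.Dict.getD_insert]
      by_cases ht : t = pvTgt e
      · subst ht
        rw [if_pos rfl, if_pos hc, if_pos hc, List.countP_cons_of_pos (by simp)]
        push_cast
        omega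
      · rw [if_neg ht, List.countP_cons_of_neg (by simpa using fun he => ht he.symm)]
    · rw [if_neg (by rw [h]; simpa using hc)]
      obtain ⟨ih1, ih2⟩ := ih dg h
      refine ⟨ih1, ?_⟩
      intro t
      rw [ih2 t]
      by_cases ht : C t = true
      · have hne : pvTgt e ≠ t := fun he => hc (he ▸ ht)
        rw [List.countP_cons_of_neg (by simpa using hne)]
      · simp only [Bool.not_eq_true] at ht
        simp [ht]

lemma pvIndegInit_getD (net : PVNet) (keys : List String) (t : String) :
    (pvIndegInit net keys).getD t 0 = if t ∈ keys then ((pvE net keys t : Nat) : Int) else 0 := by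
  have hflat : pvIndegInit net keys
      = ((keys.flatMap (fun j => pvGet net j)).foldl (fun dg e =>
          if dg.contains (pvTgt e) then dg.insert (pvTgt e) (dg.getD (pvTgt e) 0 + 1) else dg)
        (PySem.Dict.ofList (keys.map (fun k => (k, (0 : Int)))))) := by
    rw [List.foldl_flatMap]
    rfl
  rw [hflat]
  obtain ⟨_, h2⟩ := pvCnt1_fold (fun x => decide (x ∈ keys)) (keys.flatMap (fun j => pvGet net j))
    (PySem.Dict.ofList (keys.map (fun k => (k, (0 : Int)))))
    (fun x => pvConstDict_contains keys 0 x)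
  rw [h2 t, pvConstDict_getD]
  unfold pvE
  by_cases ht : t ∈ keys <;> simp [ht]

-- ---------- the supp / rev build ----------
lemma pvSR_fold (C : String → Bool) :
    ∀ (L : List (String × List String)) (sp : PySem.Dict String Int)
      (rv : PySem.Dict String (List String)),
    (∀ x, sp.contains x = C x) → (∀ p ∈ L, C p.1 = true) →
    (∀ x, (L.foldl pvSRStep (sp, rv)).1.contains x = C x) ∧
    (∀ j, (L.foldl pvSRStep (sp, rv)).1.getD j 0
        = sp.getD j 0 + ((L.countP (fun p => C (pvTgt p.2) && p.1 == j)) : Int)) ∧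
    (∀ t j, ((L.foldl pvSRStep (sp, rv)).2.getD t []).count j
        = (rv.getD t []).count j + L.countP (fun p => (C (pvTgt p.2) && pvTgt p.2 == t) && p.1 == j)) := by
  intro L
  induction L with
  | nil => intro sp rv h _; exact ⟨h, fun j => by simp, fun t j => by simp⟩
  | cons p L ih =>
    intro sp rv h hfst
    simp only [List.foldl_cons]
    have hpk : C p.1 = true := hfst p List.mem_cons_self
    by_cases hc : C (pvTgt p.2) = true
    · rw [show pvSRStep (sp, rv) p
          = (sp.insert p.1 (sp.getD p.1 0 + 1),
             rv.insert (pvTgt p.2) (rv.getD (pvTgt p.2) [] ++ [p.1])) by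
        simp [pvSRStep, h (pvTgt p.2), hc]]
      have hc' : ∀ x, (sp.insert p.1 (sp.getD p.1 0 + 1)).contains x = C x := by
        intro x
        rw [PySem.Dict.contains_insert]
        by_cases hx : x = p.1
        · simp [hx, hpk]
        · simp [hx, h x]
      obtain ⟨ih1, ih2, ih3⟩ := ih _ _ hc' (fun q hq => hfst q (List.mem_cons_of_mem _ hq))
      refine ⟨ih1, ?_, ?_⟩
      · intro j
        rw [ih2 j, PySem.Dict.getD_insert]
        by_cases hj : j = p.1
        · subst hj
          rw [if_pos rfl, List.countP_cons_of_pos (by simp [hc])]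
          push_cast
          omega
        · rw [if_neg hj, List.countP_cons_of_neg (by simp; intro _; exact fun he => hj he.symm)]
      · intro t j
        rw [ih3 t j, PySem.Dict.getD_insert]
        by_cases ht : t = pvTgt p.2
        · subst ht
          rw [if_pos rfl, List.count_append, List.countP_cons]
          by_cases hj : p.1 = j
          · simp [hc, hj]
            omega
          · simp [hc, hj]
        · rw [if_neg ht, List.countP_cons_of_neg (by simp; intro _ he; exact absurd he.symm ht)]
    · rw [show pvSRStep (sp, rv) p = (sp, rv) by
        simp [pvSRStep, h (pvTgt p.2), hc]]
      obtain ⟨ih1, ih2, ih3⟩ := ih sp rv h (fun q hq => hfst q (List.mem_cons_of_mem _ hq))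
      have hcf : C (pvTgt p.2) = false := by simpa using hc
      refine ⟨ih1, ?_, ?_⟩
      · intro j
        rw [ih2 j, List.countP_cons_of_neg (by simp [hcf])]
      · intro t j
        rw [ih3 t j, List.countP_cons_of_neg (by simp [hcf])]

lemma pvCountP_pairs (net : PVNet) (q : List String → Bool) (j : String) :
    ∀ ks : List String, ks.Nodup →
    (ks.flatMap (fun k => (pvGet net k).map (fun e => (k, e)))).countP
        (fun p => q p.2 && p.1 == j)
      = if j ∈ ks then (pvGet net j).countP q else 0 := by
  intro ks
  induction ks with
  | nil => simp
  | cons a ks ih =>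
    intro hnd
    rw [List.flatMap_cons, List.countP_append, List.countP_map, ih hnd.of_cons]
    by_cases ha : a = j
    · subst ha
      have hnj : a ∉ ks := (List.nodup_cons.mp hnd).1
      rw [if_neg hnj, if_pos List.mem_cons_self, add_zero]
      apply List.countP_congr
      intro e _
      simp
    · have h0 : List.countP ((fun p => q p.2 && p.1 == j) ∘ fun e => ((a : String), e))
          (pvGet net a) = 0 := by
        apply List.countP_eq_zero.mpr
        intro e _
        simp [ha]
      rw [h0, zero_add]
      by_cases hj : j ∈ ks
      · rw [if_pos hj, if_pos (List.mem_cons_of_mem a hj)]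
      · rw [if_neg hj, if_neg (by
          intro hm
          rcases List.mem_cons.mp hm with hm | hm
          · exact ha hm.symm
          · exact hj hm)]

lemma pvSuppRevInit_eq (net : PVNet) (alive1 : List String) :
    pvSuppRevInit net alive1
      = (alive1.flatMap (fun k => (pvGet net k).map (fun e => (k, e)))).foldl pvSRStep
          (PySem.Dict.ofList (alive1.map (fun k => (k, (0 : Int)))),
           PySem.Dict.ofList (alive1.map (fun k => (k, ([] : List String))))) := by
  rw [List.foldl_flatMap]
  unfold pvSuppRevInit
  congr 1
  funext st k
  rw [List.foldl_map]

-- ---------- worklist peeling, phase 1 ----------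
lemma pvFold1_main (net : PVNet) (alive' : List String) (st0 : List String) :
    ∀ (L : List (List String)) (dg : PySem.Dict String Int) (st : List String),
    st.Nodup → (∀ x ∈ st, x ∈ alive') →
    (∀ t ∈ alive', t ∉ st →
      dg.getD t 0 = (pvE net alive' t : Int) + (L.countP (fun e => pvTgt e == t) : Int) ∧
      0 < dg.getD t 0) →
    (∀ t ∈ st, dg.getD t 0 ≤ 0) →
    (∀ t ∈ st, t ∈ st0 ∨ pvE net alive' t = 0) →
    ((L.foldl (pvPeelStep1 alive') (dg, st)).2.Nodup ∧
     (∀ x ∈ (L.foldl (pvPeelStep1 alive') (dg, st)).2, x ∈ alive') ∧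
     (∀ t ∈ alive', t ∉ (L.foldl (pvPeelStep1 alive') (dg, st)).2 →
       (L.foldl (pvPeelStep1 alive') (dg, st)).1.getD t 0 = (pvE net alive' t : Int) ∧
       0 < (L.foldl (pvPeelStep1 alive') (dg, st)).1.getD t 0) ∧
     (∀ t ∈ (L.foldl (pvPeelStep1 alive') (dg, st)).2,
       (L.foldl (pvPeelStep1 alive') (dg, st)).1.getD t 0 ≤ 0) ∧
     (∀ t ∈ (L.foldl (pvPeelStep1 alive') (dg, st)).2, t ∈ st0 ∨ pvE net alive' t = 0)) := by
  intro L
  induction L with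
  | nil =>
    intro dg st h1 h2 h3 h4 h5
    simp only [List.foldl_nil]
    refine ⟨h1, h2, ?_, h4, h5⟩
    intro t ht hst
    have := h3 t ht hst
    simpa using this
  | cons e L ih =>
    intro dg st h1 h2 h3 h4 h5
    simp only [List.foldl_cons]
    by_cases hmem : pvTgt e ∈ alive'
    · have hc : PySem.Set.contains alive' (pvTgt e) = true :=
        (PySem.Set.contains_iff _ _).mpr hmem
      by_cases hst : pvTgt e ∈ st
      · -- already on the stack: its counter is ≤ 0 and goes further down, no push
        have hle : dg.getD (pvTgt e) 0 ≤ 0 := h4 _ hst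
        have hstep : pvPeelStep1 alive' (dg, st) e
            = (dg.insert (pvTgt e) (dg.getD (pvTgt e) 0 - 1), st) := by
          simp only [pvPeelStep1, hc, if_pos]
          rw [if_neg ?_]
          rw [PySem.Dict.getD_insert, if_pos rfl]
          simp
          omega
        rw [hstep]
        apply ih
        · exact h1
        · exact h2
        · intro t ht htst
          have hne : t ≠ pvTgt e := fun he => htst (he ▸ hst)
          have := h3 t ht htst
          rw [List.countP_cons_of_neg (by simpa using fun he => hne he.symm)] at this
          rwa [PySem.Dict.getD_insert, if_neg hne]
        · intro t htst
          rw [PySem.Dict.getD_insert]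
          by_cases hte : t = pvTgt e
          · rw [if_pos hte]
            subst hte
            omega
          · rw [if_neg hte]
            exact h4 t htst
        · exact h5
      · obtain ⟨hval, hpos⟩ := h3 (pvTgt e) hmem hst
        rw [List.countP_cons_of_pos (by simp)] at hval
        by_cases hz : dg.getD (pvTgt e) 0 - 1 = 0
        · -- the counter reaches 0: push
          have hstep : pvPeelStep1 alive' (dg, st) e
              = (dg.insert (pvTgt e) (dg.getD (pvTgt e) 0 - 1), st ++ [pvTgt e]) := by
            simp only [pvPeelStep1, hc, if_pos]
            rw [if_pos ?_]
            rw [PySem.Dict.getD_insert, if_pos rfl]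
            simp [hz]
          rw [hstep]
          have hE0 : (pvE net alive' (pvTgt e) : Int) + (L.countP (fun e' => pvTgt e' == pvTgt e) : Int) = 0 := by
            omega
          apply ih
          · simp only [List.nodup_append, List.nodup_singleton, true_and]
            refine ⟨h1, ?_⟩
            intro a ha b hb
            rw [List.mem_singleton.mp hb]
            exact fun he => hst (he ▸ ha)
          · intro x hx
            rcases List.mem_append.mp hx with hx | hx
            · exact h2 x hx
            · rw [List.mem_singleton.mp hx]; exact hmem
          · intro t ht htst
            have hne : t ≠ pvTgt e := by
              intro he
              exact htst (he ▸ List.mem_append_right _ (List.mem_singleton_self _))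
            have htst' : t ∉ st := fun hcon => htst (List.mem_append_left _ hcon)
            have := h3 t ht htst'
            rw [List.countP_cons_of_neg (by simpa using fun he => hne he.symm)] at this
            rwa [PySem.Dict.getD_insert, if_neg hne]
          · intro t htst
            rw [PySem.Dict.getD_insert]
            rcases List.mem_append.mp htst with htst | htst
            · have hne : t ≠ pvTgt e := fun he => hst (he ▸ htst)
              rw [if_neg hne]
              exact h4 t htst
            · rw [List.mem_singleton.mp htst, if_pos rfl]
              omega
          · intro t htst
            rcases List.mem_append.mp htst with htst | htst
            · exact h5 t htst
            · right
              rw [List.mem_singleton.mp htst]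
              omega
        · -- the counter stays nonzero: no push
          have hstep : pvPeelStep1 alive' (dg, st) e
              = (dg.insert (pvTgt e) (dg.getD (pvTgt e) 0 - 1), st) := by
            simp only [pvPeelStep1, hc, if_pos]
            rw [if_neg ?_]
            rw [PySem.Dict.getD_insert, if_pos rfl]
            simpa using hz
          rw [hstep]
          apply ih
          · exact h1
          · exact h2
          · intro t ht htst
            rw [PySem.Dict.getD_insert]
            by_cases hte : t = pvTgt e
            · subst hte
              rw [if_pos rfl]
              exact ⟨by omega, by omega⟩
            · rw [if_neg hte]
              have := h3 t ht htst
              rwa [List.countP_cons_of_neg (by simpa using fun he => hte he.symm)] at this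
          · intro t htst
            have hne : t ≠ pvTgt e := fun he => hst (he ▸ htst)
            rw [PySem.Dict.getD_insert, if_neg hne]
            exact h4 t htst
          · exact h5
    · have hc : PySem.Set.contains alive' (pvTgt e) = false := by
        rw [← PySem.Set.contains_iff] at hmem
        simpa using hmem
      have hstep : pvPeelStep1 alive' (dg, st) e = (dg, st) := by
        unfold pvPeelStep1
        rw [hc]
        simp
      rw [hstep]
      apply ih dg st h1 h2 ?_ h4 h5
      intro t ht htst
      have := h3 t ht htst
      rwa [List.countP_cons_of_neg
        (by simpa using fun he : pvTgt e = t => hmem (by rw [he]; exact ht))] at this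

lemma pvPeel1_main (net : PVNet) :
    ∀ (fuel : Nat) (dg : PySem.Dict String Int) (alive stack : List String),
    alive.Nodup → stack.Nodup → (∀ x ∈ stack, x ∈ alive) →
    (∀ t ∈ alive, t ∉ stack → dg.getD t 0 = (pvE net alive t : Int) ∧ 0 < dg.getD t 0) →
    (∀ t ∈ stack, dg.getD t 0 ≤ 0) →
    alive.length < fuel →
    ((pvPeel1 net fuel dg alive stack).Nodup ∧
     (∀ x ∈ pvPeel1 net fuel dg alive stack, x ∈ alive) ∧
     (∀ t ∈ pvPeel1 net fuel dg alive stack, 0 < pvE net (pvPeel1 net fuel dg alive stack) t) ∧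
     (∀ (T : List String), T.Nodup → (∀ a ∈ T, a ∈ alive) → (∀ a ∈ T, a ∉ stack) →
       (∀ t ∈ T, 0 < pvE net T t) → ∀ a ∈ T, a ∈ pvPeel1 net fuel dg alive stack)) := by
  intro fuel
  induction fuel with
  | zero => intro dg alive stack _ _ _ _ _ h; omega
  | succ fuel ih =>
    intro dg alive stack hA hS hSA h3 h4 hlen
    cases hlast : stack.getLast? with
    | none =>
      have hres : pvPeel1 net (fuel+1) dg alive stack = alive := by
        simp [pvPeel1, hlast]
      rw [hres]
      have hstack : stack = [] := List.getLast?_eq_none_iff.mp hlast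
      subst hstack
      refine ⟨hA, fun x hx => hx, ?_, ?_⟩
      · intro t ht
        obtain ⟨hval, hpos⟩ := h3 t ht (by simp)
        rw [hval] at hpos
        exact_mod_cast hpos
      · intro T _ hTsub _ _ a ha
        exact hTsub a ha
    | some k =>
      have hkst : k ∈ stack := List.mem_of_getLast? hlast
      have hkal : k ∈ alive := hSA k hkst
      have hne : stack ≠ [] := by intro h; rw [h] at hlast; cases hlast
      have hsplit : stack.dropLast ++ [k] = stack := List.dropLast_append_getLast? k hlast
      have hknd : k ∉ stack.dropLast := by
        intro hcon
        have := hS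
        rw [← hsplit] at this
        exact (List.disjoint_of_nodup_append this) hcon (List.mem_singleton_self _)
      have hdnd : stack.dropLast.Nodup := (List.dropLast_sublist stack).nodup hS
      have hmemd : ∀ t, t ∈ stack ↔ t ∈ stack.dropLast ∨ t = k := by
        intro t
        rw [← hsplit]
        simp
      obtain ⟨f1, f2, f3, f4, f5⟩ := pvFold1_main net (PySem.Set.discard alive k)
        stack.dropLast (pvGet net k) dg stack.dropLast hdnd
        (by
          intro x hx
          rw [PySem.Set.mem_discard]
          exact ⟨hSA x ((List.dropLast_sublist stack).mem hx), fun he => hknd (he ▸ hx)⟩)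
        (by
          intro t ht htst
          rw [PySem.Set.mem_discard] at ht
          have htst' : t ∉ stack := by
            rw [hmemd]
            rintro (hcon | hcon)
            · exact htst hcon
            · exact ht.2 hcon
          obtain ⟨hval, hpos⟩ := h3 t ht.1 htst'
          have hEd := pvE_discard (net := net) hA hkal t
          constructor
          · rw [hval, hEd]
            push_cast
            ring
          · exact hpos)
        (fun t htst => h4 t ((List.dropLast_sublist stack).mem htst))
        (fun t htst => Or.inl htst)
      have hres : pvPeel1 net (fuel+1) dg alive stack
          = pvPeel1 net fuel ((pvGet net k).foldl (pvPeelStep1 (PySem.Set.discard alive k)) (dg, stack.dropLast)).1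
              (PySem.Set.discard alive k)
              ((pvGet net k).foldl (pvPeelStep1 (PySem.Set.discard alive k)) (dg, stack.dropLast)).2 := by
        simp [pvPeel1, hlast]
      rw [hres]
      have hlen' : (PySem.Set.discard alive k).length < fuel := by
        have := pvDiscard_length_lt hkal
        omega
      obtain ⟨g1, g2, g3, g4⟩ := ih _ _ _ ((PySem.Set.nodup_discard alive k) hA) f1 f2 f3 f4 hlen'
      refine ⟨g1, ?_, g3, ?_⟩
      · intro x hx
        exact (PySem.Set.mem_discard alive k x).mp (g2 x hx) |>.1
      · intro T hTnd hTsub hTst hTss a ha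
        have hTsub' : ∀ b ∈ T, b ∈ PySem.Set.discard alive k := by
          intro b hb
          rw [PySem.Set.mem_discard]
          exact ⟨hTsub b hb, fun he => hTst b hb (he ▸ hkst)⟩
        apply g4 T hTnd hTsub' ?_ hTss a ha
        intro b hb hbst
        rcases f5 b hbst with hcon | hE0
        · exact hTst b hb ((List.dropLast_sublist stack).mem hcon)
        · have hm := pvE_mono (net := net) hTnd hTsub' b
          have hp := hTss b hb
          omega

-- ---------- worklist peeling, phase 2 ----------
lemma pvFold2_main (net : PVNet) (core' : List String) (st0 : List String) :
    ∀ (r : List String) (sp : PySem.Dict String Int) (st : List String),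
    st.Nodup → (∀ x ∈ st, x ∈ core') →
    (∀ j ∈ core', j ∉ st →
      sp.getD j 0 = (pvC net core' j : Int) + (r.count j : Int) ∧
      (pvGet net j ≠ [] → 0 < sp.getD j 0)) →
    (∀ j ∈ st, sp.getD j 0 ≤ 0) →
    (∀ j ∈ st, j ∈ st0 ∨ (pvC net core' j = 0 ∧ pvGet net j ≠ [])) →
    ((r.foldl (pvPeelStep2 net core') (sp, st)).2.Nodup ∧
     (∀ x ∈ (r.foldl (pvPeelStep2 net core') (sp, st)).2, x ∈ core') ∧
     (∀ j ∈ core', j ∉ (r.foldl (pvPeelStep2 net core') (sp, st)).2 →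
       (r.foldl (pvPeelStep2 net core') (sp, st)).1.getD j 0 = (pvC net core' j : Int) ∧
       (pvGet net j ≠ [] → 0 < (r.foldl (pvPeelStep2 net core') (sp, st)).1.getD j 0)) ∧
     (∀ j ∈ (r.foldl (pvPeelStep2 net core') (sp, st)).2,
       (r.foldl (pvPeelStep2 net core') (sp, st)).1.getD j 0 ≤ 0) ∧
     (∀ j ∈ (r.foldl (pvPeelStep2 net core') (sp, st)).2,
       j ∈ st0 ∨ (pvC net core' j = 0 ∧ pvGet net j ≠ []))) := by
  intro r
  induction r with
  | nil =>
    intro sp st h1 h2 h3 h4 h5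
    simp only [List.foldl_nil]
    refine ⟨h1, h2, ?_, h4, h5⟩
    intro j hj hst
    have := h3 j hj hst
    simpa using this
  | cons j0 r ih =>
    intro sp st h1 h2 h3 h4 h5
    simp only [List.foldl_cons]
    by_cases hmem : j0 ∈ core'
    · have hc : PySem.Set.contains core' j0 = true := (PySem.Set.contains_iff _ _).mpr hmem
      by_cases hst : j0 ∈ st
      · -- already on the stack: its counter is ≤ 0 and goes further down, no push
        have hle : sp.getD j0 0 ≤ 0 := h4 _ hst
        have hstep : pvPeelStep2 net core' (sp, st) j0
            = (sp.insert j0 (sp.getD j0 0 - 1), st) := by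
          unfold pvPeelStep2
          rw [hc]
          simp only [if_pos]
          rw [if_neg ?_]
          rw [PySem.Dict.getD_insert, if_pos rfl]
          simp
          omega
        rw [hstep]
        apply ih
        · exact h1
        · exact h2
        · intro j hj hjst
          have hne : j ≠ j0 := fun he => hjst (he ▸ hst)
          have := h3 j hj hjst
          rw [List.count_cons, if_neg (by simpa using fun he : j0 = j => hne he.symm)] at this
          rw [PySem.Dict.getD_insert, if_neg hne]
          simpa using this
        · intro j hjst
          rw [PySem.Dict.getD_insert]
          by_cases hje : j = j0
          · rw [if_pos hje]
            subst hje
            omega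
          · rw [if_neg hje]
            exact h4 j hjst
        · exact h5
      · obtain ⟨hval, hpos⟩ := h3 j0 hmem hst
        rw [List.count_cons, if_pos (by simp)] at hval
        by_cases hz : (sp.getD j0 0 - 1 = 0) ∧ pvGet net j0 ≠ []
        · -- the counter reaches 0 on a key with interactions: push
          have hstep : pvPeelStep2 net core' (sp, st) j0
              = (sp.insert j0 (sp.getD j0 0 - 1), st ++ [j0]) := by
            unfold pvPeelStep2
            rw [hc]
            simp only [if_pos]
            rw [if_pos ?_]
            rw [PySem.Dict.getD_insert, if_pos rfl]
            simp [hz.1, hz.2]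
          rw [hstep]
          have hC0 : (pvC net core' j0 : Int) + (r.count j0 : Int) = 0 := by
            push_cast at hval
            omega
          apply ih
          · simp only [List.nodup_append, List.nodup_singleton, true_and]
            refine ⟨h1, ?_⟩
            intro a ha b hb
            rw [List.mem_singleton.mp hb]
            exact fun he => hst (he ▸ ha)
          · intro x hx
            rcases List.mem_append.mp hx with hx | hx
            · exact h2 x hx
            · rw [List.mem_singleton.mp hx]; exact hmem
          · intro j hj hjst
            have hne : j ≠ j0 := by
              intro he
              exact hjst (he ▸ List.mem_append_right _ (List.mem_singleton_self _))
            have hjst' : j ∉ st := fun hcon => hjst (List.mem_append_left _ hcon)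
            have := h3 j hj hjst'
            rw [List.count_cons, if_neg (by simpa using fun he : j0 = j => hne he.symm)] at this
            rw [PySem.Dict.getD_insert, if_neg hne]
            simpa using this
          · intro j hjst
            rw [PySem.Dict.getD_insert]
            rcases List.mem_append.mp hjst with hjst | hjst
            · have hne : j ≠ j0 := fun he => hst (he ▸ hjst)
              rw [if_neg hne]
              exact h4 j hjst
            · rw [List.mem_singleton.mp hjst, if_pos rfl]
              omega
          · intro j hjst
            rcases List.mem_append.mp hjst with hjst | hjst
            · exact h5 j hjst
            · right
              rw [List.mem_singleton.mp hjst]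
              refine ⟨?_, hz.2⟩
              omega
        · -- no push
          have hstep : pvPeelStep2 net core' (sp, st) j0
              = (sp.insert j0 (sp.getD j0 0 - 1), st) := by
            unfold pvPeelStep2
            rw [hc]
            simp only [if_pos]
            rw [if_neg ?_]
            rw [PySem.Dict.getD_insert, if_pos rfl]
            simp only [Bool.and_eq_true, beq_iff_eq, Bool.not_eq_eq_eq_not, Bool.not_true,
              List.isEmpty_eq_false_iff, ne_eq, not_and]
            intro hz1 hz2
            exact hz ⟨hz1, hz2⟩
          rw [hstep]
          apply ih
          · exact h1
          · exact h2
          · intro j hj hjst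
            rw [PySem.Dict.getD_insert]
            by_cases hje : j = j0
            · subst hje
              rw [if_pos rfl]
              constructor
              · omega
              · intro hnil
                have hz' : ¬ (sp.getD j 0 - 1 = 0) := fun hcon => hz ⟨hcon, hnil⟩
                have := hpos hnil
                omega
            · rw [if_neg hje]
              have := h3 j hj hjst
              rw [List.count_cons, if_neg (by simpa using fun he : j0 = j => hje he.symm)] at this
              simpa using this
          · intro j hjst
            have hne : j ≠ j0 := fun he => hst (he ▸ hjst)
            rw [PySem.Dict.getD_insert, if_neg hne]
            exact h4 j hjst
          · exact h5
    · have hc : PySem.Set.contains core' j0 = false := by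
        rw [← PySem.Set.contains_iff] at hmem
        simpa using hmem
      have hstep : pvPeelStep2 net core' (sp, st) j0 = (sp, st) := by
        unfold pvPeelStep2
        rw [hc]
        simp
      rw [hstep]
      apply ih sp st h1 h2 ?_ h4 h5
      intro j hj hjst
      have := h3 j hj hjst
      rw [List.count_cons, if_neg (by simpa using fun he : j0 = j => hmem (he ▸ hj))] at this
      simpa using this

lemma pvPeel2_main (net : PVNet) (alive1 : List String) (rv : PySem.Dict String (List String))
    (hrv : ∀ t ∈ alive1, ∀ j ∈ alive1,
      ((rv.getD t []).count j : Nat) = (pvGet net j).countP (fun e => pvTgt e == t)) :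
    ∀ (fuel : Nat) (sp : PySem.Dict String Int) (core stack : List String),
    core.Nodup → (∀ x ∈ core, x ∈ alive1) → stack.Nodup → (∀ x ∈ stack, x ∈ core) →
    (∀ j ∈ core, j ∉ stack → sp.getD j 0 = (pvC net core j : Int) ∧
      (pvGet net j ≠ [] → 0 < sp.getD j 0)) →
    (∀ j ∈ stack, sp.getD j 0 ≤ 0) →
    core.length < fuel →
    ((pvPeel2 net rv fuel sp core stack).Nodup ∧
     (∀ x ∈ pvPeel2 net rv fuel sp core stack, x ∈ core) ∧
     (∀ j ∈ pvPeel2 net rv fuel sp core stack, pvGet net j = [] ∨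
        ∃ e ∈ pvGet net j, pvTgt e ∈ pvPeel2 net rv fuel sp core stack) ∧
     (∀ (T : List String), (∀ a ∈ T, a ∈ core) → (∀ a ∈ T, a ∉ stack) →
       (∀ k ∈ T, pvGet net k = [] ∨ ∃ e ∈ pvGet net k, pvTgt e ∈ T) →
       ∀ a ∈ T, a ∈ pvPeel2 net rv fuel sp core stack)) := by
  intro fuel
  induction fuel with
  | zero => intro sp core stack _ _ _ _ _ _ h; omega
  | succ fuel ih =>
    intro sp core stack hC hCA hS hSC h3 h4 hlen
    cases hlast : stack.getLast? with
    | none =>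
      have hres : pvPeel2 net rv (fuel+1) sp core stack = core := by
        simp [pvPeel2, hlast]
      rw [hres]
      have hstack : stack = [] := List.getLast?_eq_none_iff.mp hlast
      subst hstack
      refine ⟨hC, fun x hx => hx, ?_, ?_⟩
      · intro j hj
        obtain ⟨hval, hpos⟩ := h3 j hj (by simp)
        by_cases hnil : pvGet net j = []
        · exact Or.inl hnil
        · right
          have := hpos hnil
          rw [hval] at this
          have hposC : 0 < pvC net core j := by exact_mod_cast this
          exact pvC_pos_iff.mp hposC
      · intro T hTsub _ _ a ha
        exact hTsub a ha
    | some t =>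
      have htst : t ∈ stack := List.mem_of_getLast? hlast
      have htco : t ∈ core := hSC t htst
      have hta1 : t ∈ alive1 := hCA t htco
      have hne : stack ≠ [] := by intro h; rw [h] at hlast; cases hlast
      have hsplit : stack.dropLast ++ [t] = stack := List.dropLast_append_getLast? t hlast
      have htnd : t ∉ stack.dropLast := by
        intro hcon
        have := hS
        rw [← hsplit] at this
        exact (List.disjoint_of_nodup_append this) hcon (List.mem_singleton_self _)
      have hdnd : stack.dropLast.Nodup := (List.dropLast_sublist stack).nodup hS
      have hmemd : ∀ x, x ∈ stack ↔ x ∈ stack.dropLast ∨ x = t := by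
        intro x
        rw [← hsplit]
        simp
      obtain ⟨f1, f2, f3, f4, f5⟩ := pvFold2_main net (PySem.Set.discard core t)
        stack.dropLast (rv.getD t []) sp stack.dropLast hdnd
        (by
          intro x hx
          rw [PySem.Set.mem_discard]
          exact ⟨hSC x ((List.dropLast_sublist stack).mem hx), fun he => htnd (he ▸ hx)⟩)
        (by
          intro j hj hjst
          rw [PySem.Set.mem_discard] at hj
          have hjst' : j ∉ stack := by
            rw [hmemd]
            rintro (hcon | hcon)
            · exact hjst hcon
            · exact hj.2 hcon
          obtain ⟨hval, hpos⟩ := h3 j hj.1 hjst'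
          have hCd := pvC_discard (net := net) htco j
          have hcount : (rv.getD t []).count j = (pvGet net j).countP (fun e => pvTgt e == t) :=
            hrv t hta1 j (hCA j hj.1)
          constructor
          · rw [hval, hCd, hcount]
            push_cast
            ring
          · exact hpos)
        (fun j hjst => h4 j ((List.dropLast_sublist stack).mem hjst))
        (fun j hjst => Or.inl hjst)
      have hres : pvPeel2 net rv (fuel+1) sp core stack
          = pvPeel2 net rv fuel
              ((rv.getD t []).foldl (pvPeelStep2 net (PySem.Set.discard core t)) (sp, stack.dropLast)).1
              (PySem.Set.discard core t)
              ((rv.getD t []).foldl (pvPeelStep2 net (PySem.Set.discard core t)) (sp, stack.dropLast)).2 := by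
        simp [pvPeel2, hlast]
      rw [hres]
      have hlen' : (PySem.Set.discard core t).length < fuel := by
        have := pvDiscard_length_lt htco
        omega
      obtain ⟨g1, g2, g3, g4⟩ := ih _ _ _ ((PySem.Set.nodup_discard core t) hC)
        (fun x hx => hCA x ((PySem.Set.mem_discard core t x).mp hx).1) f1 f2 f3 f4 hlen'
      refine ⟨g1, ?_, g3, ?_⟩
      · intro x hx
        exact (PySem.Set.mem_discard core t x).mp (g2 x hx) |>.1
      · intro T hTsub hTst hTss a ha
        have hTsub' : ∀ b ∈ T, b ∈ PySem.Set.discard core t := by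
          intro b hb
          rw [PySem.Set.mem_discard]
          exact ⟨hTsub b hb, fun he => hTst b hb (he ▸ htst)⟩
        apply g4 T hTsub' ?_ hTss a ha
        intro b hb hbst
        rcases f5 b hbst with hcon | ⟨hC0, hnnil⟩
        · exact hTst b hb ((List.dropLast_sublist stack).mem hcon)
        · rcases hTss b hb with hnil | ⟨e, he, hteT⟩
          · exact hnnil hnil
          · have hm := pvC_mono (net := net) hTsub' b
            have hp : 0 < pvC net T b := pvC_pos_iff.mpr ⟨e, he, hteT⟩
            omega

-- ---------- assembly ----------
theorem pvMain (gn : List (String × List (List String))) :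
    ExtractCoreNetwork gn = ExtractCoreNetwork_alt gn := by
  simp only [ExtractCoreNetwork, ExtractCoreNetwork_alt]
  set d0 := (PySem.Dict.ofList gn).items with hd0def
  have hnd0 : (pvKeys d0).Nodup := by
    have := PySem.Dict.nodup_keys_ofList (ps := gn)
    simpa [pvKeys, PySem.Dict.keys] using this
  have hkeq : d0.map Prod.fst = pvKeys d0 := rfl
  rw [hkeq, PySem.Set.ofList_eq_self_of_nodup (pvKeys d0) hnd0]
  -- ===== port A: the two mutate-and-rescan loops =====
  set d1 := pvRootLoop (d0.length + 1) d0 (PySem.Set.ofList (pvTargetList d0)) with hd1def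
  set FA := pvLeafLoop (pvEdgeCount d1 + 1) d1 with hFAdef
  obtain ⟨r1, r2, r3⟩ := pvRootLoop_main d0 hnd0 (d0.length + 1) d0
    (PySem.Set.ofList (pvTargetList d0)) (List.Sublist.refl _) rfl (by omega)
  rw [← hd1def] at r1 r2 r3
  have hd1sub : d1.Sublist d0 := r1
  have hd1keys : (pvKeys d1).Sublist (pvKeys d0) := List.Sublist.map _ r1
  have hvals1 : ∀ kv ∈ d1, kv.2.Sublist (pvGet d0 kv.1) := by
    intro kv hkv
    rw [pvGet_of_sublist hnd0 hd1sub hkv]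
  have hnil1 : ∀ kv ∈ d1, kv.2 = [] → pvGet d0 kv.1 = [] := by
    intro kv hkv h
    rw [pvGet_of_sublist hnd0 hd1sub hkv, h]
  obtain ⟨l1, l2, l3, l4, l5⟩ :=
    pvLeafLoop_main d0 hnd0 (pvEdgeCount d1 + 1) d1 hd1keys hvals1 hnil1 (by omega)
  rw [← hFAdef] at l1 l2 l3 l4 l5
  -- ===== port B, phase 1: the in-degree worklist =====
  set indeg := pvIndegInit d0 (pvKeys d0) with hindegdef
  set stack0 := (pvKeys d0).filter (fun k => indeg.getD k 0 == 0) with hstack0def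
  set R1 := pvPeel1 d0 ((pvKeys d0).length + 1) indeg (pvKeys d0) stack0 with hR1def
  have hgetindeg : ∀ t ∈ pvKeys d0, indeg.getD t 0 = ((pvE d0 (pvKeys d0) t : Nat) : Int) := by
    intro t ht
    rw [hindegdef, pvIndegInit_getD, if_pos ht]
  obtain ⟨p1, p2, p3, p4⟩ := pvPeel1_main d0 ((pvKeys d0).length + 1) indeg (pvKeys d0) stack0
    hnd0 (List.Nodup.filter _ hnd0) (fun x hx => List.mem_of_mem_filter hx)
    (by
      intro t ht htst
      have hval := hgetindeg t ht
      have hnz : ¬ (indeg.getD t 0 == 0) = true := by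
        intro hcon
        exact htst (List.mem_filter.mpr ⟨ht, hcon⟩)
      refine ⟨hval, ?_⟩
      rw [hval]
      simp only [beq_iff_eq] at hnz
      rw [hval] at hnz
      omega)
    (by
      intro t htst
      have := (List.mem_filter.mp htst).2
      simp only [beq_iff_eq] at this
      omega)
    (by omega)
  rw [← hR1def] at p1 p2 p3 p4
  set alive1 := (pvKeys d0).filter (fun k => PySem.Set.contains R1 k) with halive1def
  have halive1mem : ∀ x, x ∈ alive1 ↔ x ∈ R1 := by
    intro x
    rw [halive1def, List.mem_filter]
    constructor
    · intro ⟨_, hx⟩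
      exact (PySem.Set.contains_iff R1 x).mp hx
    · intro hx
      exact ⟨p2 x hx, (PySem.Set.contains_iff R1 x).mpr hx⟩
  have halive1nd : alive1.Nodup := List.Nodup.filter _ hnd0
  have halive1sub : alive1.Sublist (pvKeys d0) := List.filter_sublist
  have hKBss : pvSS1 d0 alive1 := by
    intro k hk
    obtain ⟨j, hj, e, he, hte⟩ := pvE_pos_iff.mp (p3 k ((halive1mem k).mp hk))
    exact ⟨j, (halive1mem j).mpr hj, e, he, hte⟩
  have h1 : ∀ a ∈ pvKeys d1, a ∈ alive1 := by
    intro a ha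
    have hTss : ∀ t ∈ pvKeys d1, 0 < pvE d0 (pvKeys d1) t := by
      intro t ht
      obtain ⟨j, hj, e, he, hte⟩ := r3 t ht
      exact pvE_pos_iff.mpr ⟨j, hj, e, he, hte⟩
    have hT1 := p4 (pvKeys d1) (hd1keys.nodup hnd0) (fun b hb => hd1keys.mem hb)
      (by
        intro b hb hbst
        have hb0 : b ∈ pvKeys d0 := hd1keys.mem hb
        have hval := hgetindeg b hb0
        have := (List.mem_filter.mp hbst).2
        simp only [beq_iff_eq] at this
        rw [hval] at this
        have hmono := pvE_mono (net := d0) (hd1keys.nodup hnd0) (fun c hc => hd1keys.mem hc) b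
        have hpos := hTss b hb
        omega)
      hTss
    exact (halive1mem a).mpr (hT1 a ha)
  have h2 : ∀ a ∈ alive1, a ∈ pvKeys d1 :=
    r2 alive1 hKBss (fun a ha => halive1sub.mem ha)
  -- ===== port B, phase 2: the out-support worklist =====
  set sr := pvSuppRevInit d0 alive1 with hsrdef
  have hL2fst : ∀ p ∈ alive1.flatMap (fun k => (pvGet d0 k).map (fun e => (k, e))),
      (fun x => decide (x ∈ alive1)) p.1 = true := by
    intro p hp
    obtain ⟨k, hk, hp2⟩ := List.mem_flatMap.mp hp
    obtain ⟨e, _, hpe⟩ := List.mem_map.mp hp2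
    subst hpe
    simpa using hk
  obtain ⟨s1, s2, s3⟩ := pvSR_fold (fun x => decide (x ∈ alive1))
    (alive1.flatMap (fun k => (pvGet d0 k).map (fun e => (k, e))))
    (PySem.Dict.ofList (alive1.map (fun k => (k, (0 : Int)))))
    (PySem.Dict.ofList (alive1.map (fun k => (k, ([] : List String)))))
    (fun x => pvConstDict_contains alive1 0 x) hL2fst
  have hsupp : ∀ j ∈ alive1, sr.1.getD j 0 = ((pvC d0 alive1 j : Nat) : Int) := by
    intro j hj
    have hcp := pvCountP_pairs d0 (fun e => decide (pvTgt e ∈ alive1)) j alive1 halive1nd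
    rw [hsrdef, pvSuppRevInit_eq, s2 j, pvConstDict_getD, if_pos hj, hcp, if_pos hj, zero_add]
    rfl
  have hrv : ∀ t ∈ alive1, ∀ j ∈ alive1,
      ((sr.2.getD t []).count j : Nat) = (pvGet d0 j).countP (fun e => pvTgt e == t) := by
    intro t ht j hj
    rw [hsrdef, pvSuppRevInit_eq, s3 t j, pvConstDict_getD]
    have hcp := pvCountP_pairs d0 (fun e => decide (pvTgt e ∈ alive1) && (pvTgt e == t)) j
      alive1 halive1nd
    rw [hcp, if_pos hj]
    have hcg : (pvGet d0 j).countP (fun e => decide (pvTgt e ∈ alive1) && (pvTgt e == t))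
        = (pvGet d0 j).countP (fun e => pvTgt e == t) := by
      apply List.countP_congr
      intro e _
      simp only [Bool.and_eq_true, beq_iff_eq, decide_eq_true_eq]
      constructor
      · exact fun h => h.2
      · intro h
        exact ⟨h ▸ ht, h⟩
    rw [hcg]
    simp
  set stack0' := alive1.filter (fun k => !(pvGet d0 k).isEmpty && sr.1.getD k 0 == 0) with hstack0'def
  set R2 := pvPeel2 d0 sr.2 (alive1.length + 1) sr.1 (PySem.Set.ofList alive1) stack0' with hR2def
  rw [PySem.Set.ofList_eq_self_of_nodup alive1 halive1nd] at hR2def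
  obtain ⟨q1, q2, q3, q4⟩ := pvPeel2_main d0 alive1 sr.2 hrv (alive1.length + 1) sr.1 alive1
    stack0' halive1nd (fun x hx => hx) (List.Nodup.filter _ halive1nd)
    (fun x hx => List.mem_of_mem_filter hx)
    (by
      intro j hj hjst
      refine ⟨hsupp j hj, ?_⟩
      intro hnnil
      have hnz : ¬ ((!(pvGet d0 j).isEmpty && sr.1.getD j 0 == 0) = true) := by
        intro hcon
        exact hjst (List.mem_filter.mpr ⟨hj, hcon⟩)
      simp only [Bool.and_eq_true, Bool.not_eq_eq_eq_not, Bool.not_true, List.isEmpty_eq_false_iff,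
        ne_eq, beq_iff_eq, not_and] at hnz
      have := hnz hnnil
      have hval := hsupp j hj
      rw [hval] at this ⊢
      omega)
    (by
      intro j hjst
      have := (List.mem_filter.mp hjst).2
      simp only [Bool.and_eq_true, beq_iff_eq] at this
      omega)
    (by omega)
  rw [← hR2def] at q1 q2 q3 q4
  -- ===== the two results carve out the same key set =====
  set SB := (pvKeys d0).filter (fun k => PySem.Set.contains R2 k) with hSBdef
  have hSBmem : ∀ x, x ∈ SB ↔ x ∈ R2 := by
    intro x
    rw [hSBdef, List.mem_filter]
    constructor
    · intro ⟨_, hx⟩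
      exact (PySem.Set.contains_iff R2 x).mp hx
    · intro hx
      exact ⟨halive1sub.mem (q2 x hx), (PySem.Set.contains_iff R2 x).mpr hx⟩
  have hSBsub : SB.Sublist (pvKeys d0) := List.filter_sublist
  have hSBss : pvSS2 d0 SB := by
    intro k hk
    rcases q3 k ((hSBmem k).mp hk) with hnil | ⟨e, he, hte⟩
    · exact Or.inl hnil
    · exact Or.inr ⟨e, he, (hSBmem _).mpr hte⟩
  have hSAss : pvSS2 d0 (pvKeys FA) := by
    intro k hk
    obtain ⟨kv, hkv, rfl⟩ := List.mem_map.mp hk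
    cases hkv2 : kv.2 with
    | nil => exact Or.inl (l3 kv hkv hkv2)
    | cons e rest =>
      refine Or.inr ⟨e, (l2 kv hkv).mem (hkv2 ▸ List.mem_cons_self), ?_⟩
      exact l5 kv hkv e (by rw [hkv2]; exact List.mem_cons_self)
  have hAB : ∀ a ∈ pvKeys FA, a ∈ SB := by
    intro a ha
    have hTsub : ∀ b ∈ pvKeys FA, b ∈ alive1 := fun b hb => h1 b (l1.mem hb)
    have hT2 := q4 (pvKeys FA) hTsub
      (by
        intro b hb hbst
        have hb1 : b ∈ alive1 := hTsub b hb
        have hcond := (List.mem_filter.mp hbst).2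
        simp only [Bool.and_eq_true, Bool.not_eq_eq_eq_not, Bool.not_true,
          List.isEmpty_eq_false_iff, ne_eq, beq_iff_eq] at hcond
        obtain ⟨hnnil, hz⟩ := hcond
        rw [hsupp b hb1] at hz
        rcases hSAss b hb with hnil | ⟨e, he, hte⟩
        · exact hnnil hnil
        · have hm := pvC_mono (net := d0) hTsub b
          have hp : 0 < pvC d0 (pvKeys FA) b := pvC_pos_iff.mpr ⟨e, he, hte⟩
          omega)
      hSAss
    exact (hSBmem a).mpr (hT2 a ha)
  have hfe1 : ∀ k ∈ SB, (pvGet d1 k).filter (pvGood SB) = (pvGet d0 k).filter (pvGood SB) := by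
    intro k hk
    have hk1 : k ∈ pvKeys d1 := h2 k (q2 k ((hSBmem k).mp hk))
    rw [pvGet_of_sublist hnd0 hd1sub (pvGet_mem hk1)]
  obtain ⟨hBA, hfeSB⟩ := l4 SB hSBss
    (fun a ha => h2 a (q2 a ((hSBmem a).mp ha))) hfe1
  have hset : pvKeys FA = SB :=
    pvSublist_eq_of_mem_iff (l1.trans hd1keys) hSBsub hnd0
      (fun a => ⟨fun ha => hAB a ha, fun ha => hBA a ha⟩)
  -- ===== the surviving edge lists agree entry by entry =====
  have hfe2 : ∀ k ∈ pvKeys FA, (pvGet d1 k).filter (pvGood (pvKeys FA)) =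
      (pvGet d0 k).filter (pvGood (pvKeys FA)) := by
    intro k hk
    rw [pvGet_of_sublist hnd0 hd1sub (pvGet_mem (l1.mem hk))]
  obtain ⟨_, hfeSA⟩ := l4 (pvKeys FA) hSAss (fun a ha => l1.mem ha) hfe2
  have hndFA : (pvKeys FA).Nodup := (l1.trans hd1keys).nodup hnd0
  have hFAdet : FA = (pvKeys FA).map (fun k => (k, (pvGet d0 k).filter (pvGood (pvKeys FA)))) := by
    apply pvAssoc_det
    intro kv hkv
    have hget : pvGet FA kv.1 = kv.2 := pvGet_eq_of_mem hndFA hkv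
    have hk : kv.1 ∈ pvKeys FA := List.mem_map_of_mem hkv
    have hall : kv.2.filter (pvGood (pvKeys FA)) = kv.2 := by
      apply List.filter_eq_self.mpr
      intro e he
      simp only [pvGood, decide_eq_true_eq]
      exact l5 kv hkv e he
    calc kv.2 = kv.2.filter (pvGood (pvKeys FA)) := hall.symm
      _ = (pvGet FA kv.1).filter (pvGood (pvKeys FA)) := by rw [hget]
      _ = (pvGet d0 kv.1).filter (pvGood (pvKeys FA)) := hfeSA kv.1 hk
  rw [hFAdet, hset]
  apply List.map_congr_left
  intro k _
  refine congrArg _ ?_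
  apply List.filter_congr
  intro e _
  show pvGood SB e = PySem.Set.contains R2 (pvTgt e)
  by_cases hx : pvTgt e ∈ R2
  · rw [(PySem.Set.contains_iff R2 (pvTgt e)).mpr hx]
    simp [pvGood, (hSBmem (pvTgt e)).mpr hx]
  · have hcf : PySem.Set.contains R2 (pvTgt e) = false := by
      rw [← PySem.Set.contains_iff] at hx
      simpa using hx
    rw [hcf]
    simp only [pvGood, decide_eq_false_iff_not]
    exact fun h => hx ((hSBmem (pvTgt e)).mp h)

-- ===== VERDICT (by name: the statement is the Claim_ definition above) =====
theorem ExtractCoreNetwork_spec : Claim_equal_ExtractCoreNetwork := by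
  intro genes_network _ _
  show ExtractCoreNetwork genes_network = ExtractCoreNetwork_alt genes_network
  exact pvMain genes_network
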